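-- pv_equiv track=rewrite | github.com/quietgong/AlgorithmNote | PROGRAMMERS/프렌즈4블록.py | solution
-- ===== SOURCE A (Python) =====
-- def solution(m, n, board):
--     answer = 0
--     for i in range(len(board)):
--         board[i] = list(board[i]) # 다루기 쉽게 문자열을 리스트로 변환
--     while True:
--         remove = [[0] * n for _ in range(m)] # 지워진 위치를 저장하기 위해 remove 리스트 사용
--         for i in range(m - 1):
--             for j in range(n - 1):
--                 if board[i][j] != 0 and board[i][j] == board[i][j + 1] and board[i][j] == board[i + 1][j] and board[i][j] == \
--                         board[i + 1][j + 1]: # 2x2 배열이 모두 같으면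
--                     remove[i][j], remove[i][j + 1], remove[i + 1][j], remove[i + 1][j + 1] = 1, 1, 1, 1
--         cnt = 0
--         for i in range(m):
--             cnt += sum(remove[i])
--         answer += cnt
--         if cnt == 0: # 사라지는 블록이 없으면 반복문 종료
--             break
--         for i in range(m - 1, -1, -1):
--             for j in range(n):
--                 if remove[i][j] == 1:
--                     x = i - 1
--                     while x >= 0 and remove[x][j] == 1:
--                         x -= 1
--                     if x < 0:
--                         board[i][j] = 0
--                     else:
--                         board[i][j] = board[x][j]
--                         remove[x][j] = 1
--
--     return answer
-- ===== SOURCE B (Python) =====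
-- def solution(m, n, board):
--     # column-major re-implementation; mirrors A's in-place string->list conversion of `board`
--     for i in range(len(board)):
--         board[i] = list(board[i])
--     if m < 2 or n < 2:          # no 2x2 window fits, nothing can ever be removed
--         return 0
--     cols = [[board[i][j] for i in range(m)] for j in range(n)]
--     answer = 0
--     while True:
--         marks = [[False] * m for _ in range(n)]
--         for j in range(n - 1):
--             for i in range(m - 1):
--                 v = cols[j][i]
--                 if v != 0 and v == cols[j][i + 1] and v == cols[j + 1][i] and v == cols[j + 1][i + 1]:
--                     marks[j][i] = marks[j][i + 1] = marks[j + 1][i] = marks[j + 1][i + 1] = True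
--         cnt = sum(mk.count(True) for mk in marks)
--         if cnt == 0:
--             return answer
--         answer += cnt
--         for j in range(n):
--             survivors = [cols[j][i] for i in range(m) if not marks[j][i]]
--             cols[j] = [0] * (m - len(survivors)) + survivors
-- ===== Notes on version B (the rewrite author's own statement) =====
-- stated objective: alternative
-- what changed: B works column-major: it transposes the board once, scans 2x2 windows on columns, and replaces A's bottom-up in-place pull-down gravity (nearest-unremoved-above search with re-marking) by rebuilding each column as zeros followed by its surviving cells, with an early return 0 when no 2x2 window fits (m<2 or n<2).
-- outside the precondition, e.g. on solution(3, 2, ['ab', 'cd']): A returns 0, B raises IndexError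
import Mathlib
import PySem

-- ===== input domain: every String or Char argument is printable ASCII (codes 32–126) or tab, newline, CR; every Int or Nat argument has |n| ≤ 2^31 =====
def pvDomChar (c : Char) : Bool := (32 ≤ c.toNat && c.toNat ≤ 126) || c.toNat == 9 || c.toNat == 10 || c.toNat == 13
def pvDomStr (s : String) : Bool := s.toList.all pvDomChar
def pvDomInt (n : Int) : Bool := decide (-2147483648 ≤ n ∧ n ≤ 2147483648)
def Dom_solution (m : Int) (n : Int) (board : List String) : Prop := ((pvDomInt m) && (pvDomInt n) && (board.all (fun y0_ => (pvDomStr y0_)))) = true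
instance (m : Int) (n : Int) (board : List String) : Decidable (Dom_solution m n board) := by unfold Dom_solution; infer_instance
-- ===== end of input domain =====

-- B is a column-major re-implementation (transpose once, scan and compact columns); the proved
-- equivalence is about the RETURN value only (the Python A mutates `board` in place, B mirrors
-- only the string→list conversion of the rows).

-- ===== PORT A =====
-- cells hold the character code of a one-char string, or 0 once cleared by gravity
-- (exact on Dom: all admitted characters have code ≥ 9 ≠ 0, like a Python char never equals int 0)
def cellA (bd : List (List Int)) (i j : Int) : Int :=
  PySem.List.pyGetD (PySem.List.pyGetD bd i []) j 0

def setCellA (bd : List (List Int)) (i j : Int) (v : Int) : List (List Int) :=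
  PySem.List.pySetD bd i (PySem.List.pySetD (PySem.List.pyGetD bd i []) j v)

def condA (bd : List (List Int)) (i j : Int) : Bool :=
  cellA bd i j != 0 && cellA bd i j == cellA bd i (j + 1) &&
    cellA bd i j == cellA bd (i + 1) j && cellA bd i j == cellA bd (i + 1) (j + 1)

def buildRemoveA (m n : Int) (bd : List (List Int)) : List (List Int) :=
  (PySem.List.pyRange 0 (m - 1) 1).foldl (fun rm i =>
    (PySem.List.pyRange 0 (n - 1) 1).foldl (fun rm j =>
      if condA bd i j then
        setCellA (setCellA (setCellA (setCellA rm i j 1) i (j + 1) 1) (i + 1) j 1) (i + 1) (j + 1) 1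
      else rm) rm)
    ((PySem.List.pyRange 0 m 1).map (fun _ => List.replicate n.toNat (0 : Int)))

def cntA (m : Int) (rm : List (List Int)) : Int :=
  (PySem.List.pyRange 0 m 1).foldl
    (fun c i => c + (PySem.List.pyGetD rm i []).foldl (· + ·) 0) 0

-- the inner `while x >= 0 and remove[x][j] == 1: x -= 1`
def findXA (rm : List (List Int)) (j : Int) (x : Int) : Int :=
  if h : 0 ≤ x ∧ cellA rm x j = 1 then findXA rm j (x - 1) else x
termination_by (x + 1).toNat
decreasing_by omega

def gravityA (m n : Int) (st : List (List Int) × List (List Int)) :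
    List (List Int) × List (List Int) :=
  (PySem.List.pyRange (m - 1) (-1) (-1)).foldl (fun st i =>
    (PySem.List.pyRange 0 n 1).foldl (fun st j =>
      if cellA st.2 i j = 1 then
        let x := findXA st.2 j (i - 1)
        if x < 0 then (setCellA st.1 i j 0, st.2)
        else (setCellA st.1 i j (cellA st.1 x j), setCellA st.2 x j 1)
      else st) st) st

-- `while True` as fuel recursion; at most m*n/4 productive rounds exist, so the fuel below never runs out
def loopA (m n : Int) : Nat → Int → List (List Int) → Int
  | 0, ans, _ => ans
  | fuel + 1, ans, bd =>
    let rm := buildRemoveA m n bd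
    let c := cntA m rm
    if c = 0 then ans + c
    else loopA m n fuel (ans + c) (gravityA m n (bd, rm)).1

def solution (m : Int) (n : Int) (board : List String) : Int :=
  loopA m n (m.toNat * n.toNat + 1) 0
    (board.map (fun s => s.toList.map (fun c => (c.toNat : Int))))

-- ===== PORT B =====
def colCellB (cols : List (List Int)) (j i : Int) : Int :=
  PySem.List.pyGetD (PySem.List.pyGetD cols j []) i 0

def markSetB (mks : List (List Bool)) (j i : Int) : List (List Bool) :=
  PySem.List.pySetD mks j (PySem.List.pySetD (PySem.List.pyGetD mks j []) i true)

def buildMarksB (m n : Int) (cols : List (List Int)) : List (List Bool) :=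
  (PySem.List.pyRange 0 (n - 1) 1).foldl (fun mks j =>
    (PySem.List.pyRange 0 (m - 1) 1).foldl (fun mks i =>
      let v := colCellB cols j i
      if v != 0 && v == colCellB cols j (i + 1) && v == colCellB cols (j + 1) i &&
          v == colCellB cols (j + 1) (i + 1) then
        markSetB (markSetB (markSetB (markSetB mks j i) j (i + 1)) (j + 1) i) (j + 1) (i + 1)
      else mks) mks)
    ((PySem.List.pyRange 0 n 1).map (fun _ => List.replicate m.toNat false))

def cntB (mks : List (List Bool)) : Int :=
  mks.foldl (fun c mk => c + PySem.List.count mk true) 0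

def newColB (m : Int) (col : List Int) (mk : List Bool) : List Int :=
  let survivors :=
    ((PySem.List.pyRange 0 m 1).filter (fun i => !PySem.List.pyGetD mk i false)).map
      (fun i => PySem.List.pyGetD col i 0)
  List.replicate (m - PySem.List.len survivors).toNat 0 ++ survivors

def gravityB (m n : Int) (cols : List (List Int)) (mks : List (List Bool)) : List (List Int) :=
  (PySem.List.pyRange 0 n 1).foldl (fun cs j =>
    PySem.List.pySetD cs j
      (newColB m (PySem.List.pyGetD cs j []) (PySem.List.pyGetD mks j []))) cols

def loopB (m n : Int) : Nat → Int → List (List Int) → Int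
  | 0, ans, _ => ans
  | fuel + 1, ans, cols =>
    let mks := buildMarksB m n cols
    let c := cntB mks
    if c = 0 then ans
    else loopB m n fuel (ans + c) (gravityB m n cols mks)

def solution_alt (m : Int) (n : Int) (board : List String) : Int :=
  let bl := board.map (fun s => s.toList.map (fun c => (c.toNat : Int)))
  if m < 2 ∨ n < 2 then 0
  else
    loopB m n (m.toNat * n.toNat + 1) 0
      ((PySem.List.pyRange 0 n 1).map (fun j =>
        (PySem.List.pyRange 0 m 1).map (fun i => colCellB bl i j)))

-- ===== PRECONDITION & SPEC =====
-- Pre_ excludes boards that do not actually contain the declared m×n grid when m,n ≥ 2: there A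
-- either raises IndexError or, when its short-circuited comparisons happen never to reach a
-- missing cell, accidentally returns 0; B's transpose touches every declared cell and raises.
def Pre_solution (m : Int) (n : Int) (board : List String) : Prop :=
  m ≤ 1 ∨ n ≤ 1 ∨ (m ≤ board.length ∧ ∀ s ∈ board.take m.toNat, n ≤ (s.toList.length : Int))
instance (m : Int) (n : Int) (board : List String) : Decidable (Pre_solution m n board) := by
  unfold Pre_solution; infer_instance

def pvWitness_solution : Int × Int × List String := (2, 2, ["ab", "ab"])

def Spec_solution (m : Int) (n : Int) (board : List String) (out : Int) : Prop :=
  out = solution_alt m n board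
instance (m : Int) (n : Int) (board : List String) (out : Int) : Decidable (Spec_solution m n board out) := by
  unfold Spec_solution; infer_instance

-- ===== CLAIM (what is proved, stated in full; the proofs are below) =====
def Claim_equal_solution : Prop := ∀ (m : Int) (n : Int) (board : List String),
  Dom_solution m n board → Pre_solution m n board → Spec_solution m n board (solution m n board)

-- ===== LEMMAS AND PROOFS =====

-- ---------- foundations: matrix entries, updates, column projection ----------

def ent {α : Type} (bd : List (List α)) (i j : Nat) (d : α) : α := (bd.getD i []).getD j d

def upd {α : Type} (bd : List (List α)) (i j : Nat) (v : α) : List (List α) :=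
  bd.set i ((bd.getD i []).set j v)

def MatShape {α : Type} (s : List (List α)) (p q : Nat) : Prop :=
  s.length = p ∧ ∀ row ∈ s, row.length = q

-- board shape: at least p rows, each of the first p rows at least q wide
def BShape (bd : List (List Int)) (p q : Nat) : Prop :=
  p ≤ bd.length ∧ ∀ i < p, q ≤ (bd.getD i []).length

theorem length_upd {α : Type} (bd : List (List α)) (i j : Nat) (v : α) :
    (upd bd i j v).length = bd.length := by simp [upd]

theorem getD_mem_of_lt {α : Type} {s : List (List α)} {i : Nat} (h : i < s.length) :
    s.getD i [] ∈ s := by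
  rw [List.getD_eq_getElem _ _ h]; exact List.getElem_mem h

theorem getD_row_eq {α : Type} (bd : List (List α)) {i : Nat} (h : i < bd.length) :
    bd.getD i [] = bd[i] := List.getD_eq_getElem _ _ h

theorem rowlen_upd {α : Type} (bd : List (List α)) (i j : Nat) (v : α) (i' : Nat) :
    ((upd bd i j v).getD i' []).length = (bd.getD i' []).length := by
  unfold upd
  by_cases hi : i < bd.length
  · by_cases h : i = i'
    · subst h
      rw [List.getD_eq_getElem _ _ (by simpa using hi), List.getElem_set,
        if_pos rfl, List.length_set, getD_row_eq bd hi]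
    · rw [List.getD_eq_getElem?_getD, List.getElem?_set, if_neg h, ← List.getD_eq_getElem?_getD]
  · rw [List.set_eq_of_length_le (by omega)]

theorem getD_upd_self {α : Type} (bd : List (List α)) {i : Nat} (j : Nat) (v : α)
    (hi : i < bd.length) : (upd bd i j v).getD i [] = (bd.getD i []).set j v := by
  unfold upd
  rw [List.getD_eq_getElem _ _ (by simpa using hi), List.getElem_set, if_pos rfl]

theorem getD_upd_ne {α : Type} (bd : List (List α)) {i : Nat} (j : Nat) (v : α)
    {i' : Nat} (h : i ≠ i') : (upd bd i j v).getD i' [] = bd.getD i' [] := by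
  unfold upd
  rw [List.getD_eq_getElem?_getD, List.getElem?_set, if_neg h, ← List.getD_eq_getElem?_getD]

theorem ent_upd {α : Type} (bd : List (List α)) {i j : Nat} (v d : α)
    (hi : i < bd.length) (hj : j < (bd.getD i []).length) (i' j' : Nat) :
    ent (upd bd i j v) i' j' d = if i' = i ∧ j' = j then v else ent bd i' j' d := by
  unfold ent
  by_cases h : i = i'
  · subst h
    rw [getD_upd_self bd j v hi]
    by_cases h2 : j = j'
    · subst h2
      rw [List.getD_eq_getElem _ _ (by simpa using hj), List.getElem_set, if_pos rfl,
        if_pos ⟨rfl, rfl⟩]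
    · rw [List.getD_eq_getElem?_getD, List.getElem?_set, if_neg h2,
        ← List.getD_eq_getElem?_getD, if_neg (by tauto)]
  · rw [getD_upd_ne bd j v h, if_neg (by tauto)]

theorem matshape_upd {α : Type} {s : List (List α)} {p q : Nat} (hs : MatShape s p q)
    (i j : Nat) (v : α) : MatShape (upd s i j v) p q := by
  obtain ⟨h1, h2⟩ := hs
  by_cases hi : i < s.length
  · refine ⟨by simp [upd, h1], ?_⟩
    intro row hrow
    rcases List.mem_or_eq_of_mem_set hrow with h | h
    · exact h2 _ h
    · subst h
      rw [List.length_set]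
      exact h2 _ (getD_mem_of_lt hi)
  · unfold upd
    rw [List.set_eq_of_length_le (by omega)]
    exact ⟨h1, h2⟩

-- column j of the first p rows
def colOf (bd : List (List Int)) (p j : Nat) : List Int :=
  (List.range p).map (fun i => ent bd i j 0)

theorem length_colOf (bd : List (List Int)) (p j : Nat) : (colOf bd p j).length = p := by
  simp [colOf]

theorem getD_colOf (bd : List (List Int)) (p j : Nat) {i : Nat} (h : i < p) (d : Int) :
    (colOf bd p j).getD i d = ent bd i j 0 := by
  simp [colOf, List.getD_eq_getElem?_getD, List.getElem?_map, List.getElem?_range h]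

-- generic fold helpers
theorem foldl_preserve {σ ι : Type} (P : σ → Prop) (f : σ → ι → σ) (L : List ι)
    (h : ∀ s x, x ∈ L → P s → P (f s x)) : ∀ s, P s → P (L.foldl f s) := by
  induction L with
  | nil => intro s hs; exact hs
  | cons a L ih =>
    intro s hs
    exact ih (fun s x hx => h s x (List.mem_cons_of_mem _ hx)) _ (h s a List.mem_cons_self hs)

theorem foldl_nest_flat {σ ι κ : Type} (L1 : List ι) (L2 : ι → List κ) (F : σ → ι × κ → σ) :
    ∀ s : σ, L1.foldl (fun s x => (L2 x).foldl (fun s y => F s (x, y)) s) s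
      = (L1.flatMap (fun x => (L2 x).map (fun y => (x, y)))).foldl F s := by
  induction L1 with
  | nil => intro s; rfl
  | cons a L ih =>
    intro s
    simp [List.foldl_append, List.foldl_map, ih]


-- ---------- bridges from the ports' Int-indexed primitives to Nat world ----------

theorem cellA_nat (bd : List (List Int)) (i j : Nat) :
    cellA bd (i : Int) (j : Int) = ent bd i j 0 := by
  simp [cellA, ent, PySem.List.pyGetD_natCast]

theorem setCellA_nat (bd : List (List Int)) (i j : Nat) (v : Int) :
    setCellA bd (i : Int) (j : Int) v = upd bd i j v := by
  simp [setCellA, upd, PySem.List.pySetD_natCast, PySem.List.pyGetD_natCast]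

theorem colCellB_nat (cols : List (List Int)) (j i : Nat) :
    colCellB cols (j : Int) (i : Int) = ent cols j i 0 := by
  simp [colCellB, ent, PySem.List.pyGetD_natCast]

theorem markSetB_nat (mks : List (List Bool)) (j i : Nat) :
    markSetB mks (j : Int) (i : Int) = upd mks j i true := by
  simp [markSetB, upd, PySem.List.pySetD_natCast, PySem.List.pyGetD_natCast]

-- ---------- generic characterization of the "mark 2x2 windows" double loop ----------

def updMany {α : Type} (s : List (List α)) (ps : List (Nat × Nat)) (v : α) : List (List α) :=
  ps.foldl (fun s pr => upd s pr.1 pr.2 v) s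

theorem matshape_updMany {α : Type} {s : List (List α)} {p q : Nat} (hs : MatShape s p q)
    (ps : List (Nat × Nat)) (v : α) : MatShape (updMany s ps v) p q :=
  foldl_preserve (fun s => MatShape s p q) _ ps (fun _ pr _ h => matshape_upd h pr.1 pr.2 v) s hs

theorem ent_updMany {α : Type} {p q : Nat} (ps : List (Nat × Nat)) (v d : α) :
    ∀ (s : List (List α)), MatShape s p q → (∀ pr ∈ ps, pr.1 < p ∧ pr.2 < q) →
    ∀ i j, i < p → j < q →
      ent (updMany s ps v) i j d = if (i, j) ∈ ps then v else ent s i j d := by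
  induction ps with
  | nil => intro s _ _ i j _ _; simp [updMany]
  | cons pr ps ih =>
    intro s hs hb i j hi hj
    have hpr := hb pr List.mem_cons_self
    have hlen : pr.1 < s.length := by rw [hs.1]; exact hpr.1
    have hrl : pr.2 < (s.getD pr.1 []).length := by
      rw [hs.2 _ (getD_mem_of_lt hlen)]; exact hpr.2
    have step : updMany s (pr :: ps) v = updMany (upd s pr.1 pr.2 v) ps v := rfl
    rw [step, ih _ (matshape_upd hs pr.1 pr.2 v)
      (fun x hx => hb x (List.mem_cons_of_mem _ hx)) i j hi hj,
      ent_upd s v d hlen hrl i j]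
    by_cases hmem : (i, j) ∈ ps
    · simp [hmem]
    · by_cases he : (i, j) = pr
      · cases he; simp
      · have : ¬(i = pr.1 ∧ j = pr.2) := by
          intro ⟨h1, h2⟩; exact he (by cases pr; simp_all)
        simp [hmem, he, this]

theorem mark_fold {κ α : Type} {p q : Nat} (cond : κ → Bool) (tg : κ → List (Nat × Nat))
    (v d : α) (L : List κ) :
    ∀ (s : List (List α)), MatShape s p q →
    (∀ k ∈ L, ∀ pr ∈ tg k, pr.1 < p ∧ pr.2 < q) →
      MatShape (L.foldl (fun s k => if cond k then updMany s (tg k) v else s) s) p q ∧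
      ∀ i j, i < p → j < q →
        ent (L.foldl (fun s k => if cond k then updMany s (tg k) v else s) s) i j d
          = if (∃ k ∈ L, cond k = true ∧ (i, j) ∈ tg k) then v else ent s i j d := by
  induction L with
  | nil => intro s hs _; exact ⟨hs, fun i j _ _ => by simp⟩
  | cons a L ih =>
    intro s hs hb
    have hs' : MatShape (if cond a then updMany s (tg a) v else s) p q := by
      split
      · exact matshape_updMany hs _ v
      · exact hs
    obtain ⟨hshape, hent⟩ := ih _ hs' (fun k hk => hb k (List.mem_cons_of_mem _ hk))
    refine ⟨hshape, ?_⟩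
    intro i j hi hj
    rw [List.foldl_cons, hent i j hi hj]
    by_cases hL : ∃ k ∈ L, cond k = true ∧ (i, j) ∈ tg k
    · simp only [if_pos hL]
      rw [if_pos ⟨_, List.mem_cons_of_mem a hL.choose_spec.1, hL.choose_spec.2⟩]
    · rw [if_neg hL]
      by_cases hc : cond a = true
      · rw [if_pos hc, ent_updMany (tg a) v d s hs (hb a List.mem_cons_self) i j hi hj]
        by_cases hm : (i, j) ∈ tg a
        · rw [if_pos hm, if_pos ⟨a, List.mem_cons_self, hc, hm⟩]
        · rw [if_neg hm, if_neg (by simp_all)]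
      · simp only [Bool.not_eq_true] at hc
        rw [if_neg (by simp [hc]), if_neg (by simp_all)]

-- ---------- matrix extensionality ----------

theorem matEq {α : Type} {s : List (List α)} {p q : Nat} (d : α) (f : Nat → Nat → α)
    (hs : MatShape s p q) (h : ∀ i j, i < p → j < q → ent s i j d = f i j) :
    s = (List.range p).map (fun i => (List.range q).map (f i)) := by
  apply List.ext_getElem
  · simp [hs.1]
  · intro i h1 h2
    have hip : i < p := by simpa [hs.1] using h1
    have hrow : s[i].length = q := hs.2 _ (List.getElem_mem h1)
    simp only [List.getElem_map, List.getElem_range]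
    apply List.ext_getElem
    · simp [hrow]
    · intro j hj1 hj2
      have hjq : j < q := by simpa [hrow] using hj1
      have := h i j hip hjq
      rw [ent, List.getD_eq_getElem _ _ h1, List.getD_eq_getElem _ _ (by omega)] at this
      simpa using this

-- ---------- the removal mask both programs compute, as a predicate ----------

abbrev unifA (bd : List (List Int)) (a b : Nat) : Prop :=
  ent bd a b 0 ≠ 0 ∧ ent bd a b 0 = ent bd a (b + 1) 0 ∧
    ent bd a b 0 = ent bd (a + 1) b 0 ∧ ent bd a b 0 = ent bd (a + 1) (b + 1) 0

abbrev PA (bd : List (List Int)) (p q i j : Nat) : Prop :=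
  ∃ a ∈ List.range p, ∃ b ∈ List.range q,
    a + 1 < p ∧ b + 1 < q ∧ unifA bd a b ∧ (i = a ∨ i = a + 1) ∧ (j = b ∨ j = b + 1)

theorem condA_iff (bd : List (List Int)) (a b : Nat) :
    condA bd (a : Int) (b : Int) = true ↔ unifA bd a b := by
  have h1 : ((a : Int) + 1) = ((a + 1 : Nat) : Int) := by push_cast; ring
  have h2 : ((b : Int) + 1) = ((b + 1 : Nat) : Int) := by push_cast; ring
  unfold condA unifA
  rw [h1, h2]
  simp only [cellA_nat, Bool.and_eq_true, bne_iff_ne, beq_iff_eq, ne_eq]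
  tauto

theorem set4_eq (bd : List (List Int)) (rm : List (List Int)) (a b : Nat) :
    (if condA bd (a : Int) (b : Int) then
        setCellA (setCellA (setCellA (setCellA rm (a : Int) (b : Int) 1) (a : Int) ((b : Int) + 1) 1)
          ((a : Int) + 1) (b : Int) 1) ((a : Int) + 1) ((b : Int) + 1) 1
      else rm)
    = if condA bd (a : Int) (b : Int) then
        updMany rm [(a, b), (a, b + 1), (a + 1, b), (a + 1, b + 1)] 1 else rm := by
  have h1 : ((a : Int) + 1) = ((a + 1 : Nat) : Int) := by push_cast; ring
  have h2 : ((b : Int) + 1) = ((b + 1 : Nat) : Int) := by push_cast; ring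
  simp only [h1, h2, setCellA_nat, updMany, List.foldl_cons, List.foldl_nil]

theorem getD_replicate_self {α : Type} (k j : Nat) (c : α) :
    (List.replicate k c).getD j c = c := by
  rcases Nat.lt_or_ge j k with h | h
  · rw [List.getD_eq_getElem _ _ (by simpa using h)]; simp
  · rw [List.getD_eq_getElem?_getD, List.getElem?_eq_none (by simpa using h)]; rfl

theorem pyRange_cast (k : Int) (h : 0 ≤ k) :
    PySem.List.pyRange 0 k = List.map (fun t : Nat => (t : Int)) (List.range k.toNat) := by
  have := PySem.List.pyRange_zero_natCast k.toNat
  rwa [show ((k.toNat : Nat) : Int) = k by omega] at this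

def markStepA (bd : List (List Int)) (s : List (List Int)) (k : Nat × Nat) : List (List Int) :=
  if condA bd (k.1 : Int) (k.2 : Int) then
    updMany s [(k.1, k.2), (k.1, k.2 + 1), (k.1 + 1, k.2), (k.1 + 1, k.2 + 1)] 1
  else s

theorem removeA_char (m n : Int) (bd : List (List Int)) (hm : 2 ≤ m) (hn : 2 ≤ n) :
    buildRemoveA m n bd = (List.range m.toNat).map (fun i =>
      (List.range n.toNat).map (fun j =>
        if PA bd m.toNat n.toNat i j then (1 : Int) else 0)) := by
  have hm1 : (m - 1 : Int).toNat = m.toNat - 1 := by omega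
  have hn1 : (n - 1 : Int).toNat = n.toNat - 1 := by omega
  unfold buildRemoveA
  rw [pyRange_cast (m - 1) (by omega), pyRange_cast (n - 1) (by omega),
    pyRange_cast m (by omega), hm1, hn1]
  have hiniteq : (List.map (fun t : Nat => (t : Int)) (List.range m.toNat)).map
      (fun _ => List.replicate n.toNat (0 : Int))
      = List.replicate m.toNat (List.replicate n.toNat (0 : Int)) := by
    rw [List.map_map,
      show ((fun _ : Int => List.replicate n.toNat (0 : Int)) ∘ (fun t : Nat => (t : Int)))
        = (fun _ : Nat => List.replicate n.toNat (0 : Int)) from rfl,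
      List.map_const', List.length_range]
  rw [hiniteq, List.foldl_map]
  have inner_eq : ∀ (a : Nat) (rm : List (List Int)),
      (List.map (fun t : Nat => (t : Int)) (List.range (n.toNat - 1))).foldl
        (fun rm (b : Int) =>
          if condA bd (a : Int) b then
            setCellA (setCellA (setCellA (setCellA rm (a : Int) b 1) (a : Int) (b + 1) 1)
              ((a : Int) + 1) b 1) ((a : Int) + 1) (b + 1) 1
          else rm) rm
      = (List.range (n.toNat - 1)).foldl (fun rm b => markStepA bd rm (a, b)) rm := by
    intro a rm
    rw [List.foldl_map]
    exact PySem.List.foldl_congr_mem _ _ _ _ (fun acc b hb => set4_eq bd acc a b)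
  trans ((List.range (m.toNat - 1)).foldl (fun rm (a : Nat) =>
      (List.range (n.toNat - 1)).foldl (fun rm (b : Nat) => markStepA bd rm (a, b)) rm)
      (List.replicate m.toNat (List.replicate n.toNat (0 : Int))))
  · exact PySem.List.foldl_congr_mem _ _ _ _ (fun acc a ha => inner_eq a acc)
  rw [foldl_nest_flat (List.range (m.toNat - 1)) (fun _ => List.range (n.toNat - 1))
    (markStepA bd)]
  have hinit : MatShape (List.replicate m.toNat (List.replicate n.toNat (0 : Int)))
      m.toNat n.toNat := by
    refine ⟨by simp, ?_⟩
    intro row hrow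
    rw [List.eq_of_mem_replicate hrow]
    simp
  obtain ⟨hshape, hent⟩ := mark_fold
    (fun k : Nat × Nat => condA bd (k.1 : Int) (k.2 : Int))
    (fun k : Nat × Nat => [(k.1, k.2), (k.1, k.2 + 1), (k.1 + 1, k.2), (k.1 + 1, k.2 + 1)])
    (1 : Int) (0 : Int)
    ((List.range (m.toNat - 1)).flatMap fun a => (List.range (n.toNat - 1)).map fun b => (a, b))
    _ hinit (by
      intro k hk pr hpr
      simp only [List.mem_flatMap, List.mem_map, List.mem_range] at hk
      obtain ⟨a, ha, b, hb, hab⟩ := hk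
      subst hab
      simp only [List.mem_cons, List.not_mem_nil, or_false] at hpr
      rcases hpr with h | h | h | h <;> (subst h; exact ⟨by omega, by omega⟩))
  unfold markStepA
  apply matEq (0 : Int)
  · exact hshape
  · intro i j hi hj
    rw [hent i j hi hj]
    have hz : ent (List.replicate m.toNat (List.replicate n.toNat (0 : Int))) i j 0 = 0 := by
      unfold ent
      rcases Nat.lt_or_ge i m.toNat with h | h
      · have hr : (List.replicate m.toNat (List.replicate n.toNat (0 : Int))).getD i []
            = List.replicate n.toNat (0 : Int) := by
          rw [List.getD_eq_getElem _ _ (by simpa using h)]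
          exact List.getElem_replicate _
        rw [hr]
        exact getD_replicate_self _ j 0
      · have hr : (List.replicate m.toNat (List.replicate n.toNat (0 : Int))).getD i []
            = ([] : List Int) := by
          rw [List.getD_eq_getElem?_getD, List.getElem?_eq_none (by simpa using h)]
          rfl
        rw [hr]
        rfl
    rw [hz]
    congr 1
    simp only [eq_iff_iff]
    constructor
    · rintro ⟨k, hk, hc, hmem⟩
      simp only [List.mem_flatMap, List.mem_map, List.mem_range] at hk
      obtain ⟨a, ha, b, hb, hab⟩ := hk
      subst hab
      refine ⟨a, List.mem_range.2 (by omega), b, List.mem_range.2 (by omega), by omega, by omega,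
        (condA_iff bd a b).1 hc, ?_⟩
      simp only [List.mem_cons, List.not_mem_nil, or_false, Prod.mk.injEq] at hmem
      tauto
    · rintro ⟨a, ha, b, hb, hap, hbq, hu, hij⟩
      refine ⟨(a, b), ?_, (condA_iff bd a b).2 hu, ?_⟩
      · simp only [List.mem_flatMap, List.mem_map, List.mem_range]
        exact ⟨a, by omega, b, by omega, rfl⟩
      · simp only [List.mem_cons, List.not_mem_nil, or_false, Prod.mk.injEq]
        tauto

abbrev unifB (cols : List (List Int)) (b a : Nat) : Prop :=
  ent cols b a 0 ≠ 0 ∧ ent cols b a 0 = ent cols b (a + 1) 0 ∧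
    ent cols b a 0 = ent cols (b + 1) a 0 ∧ ent cols b a 0 = ent cols (b + 1) (a + 1) 0

abbrev PB (cols : List (List Int)) (q p j i : Nat) : Prop :=
  ∃ b ∈ List.range q, ∃ a ∈ List.range p,
    b + 1 < q ∧ a + 1 < p ∧ unifB cols b a ∧ (j = b ∨ j = b + 1) ∧ (i = a ∨ i = a + 1)

theorem condB_iff (cols : List (List Int)) (b a : Nat) :
    (colCellB cols (b : Int) (a : Int) != 0 && colCellB cols (b : Int) (a : Int) == colCellB cols (b : Int) ((a : Int) + 1) &&
      colCellB cols (b : Int) (a : Int) == colCellB cols ((b : Int) + 1) (a : Int) && colCellB cols (b : Int) (a : Int) == colCellB cols ((b : Int) + 1) ((a : Int) + 1)) = true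
    ↔ unifB cols b a := by
  have h1 : ((a : Int) + 1) = ((a + 1 : Nat) : Int) := by push_cast; ring
  have h2 : ((b : Int) + 1) = ((b + 1 : Nat) : Int) := by push_cast; ring
  unfold unifB
  rw [h1, h2]
  simp only [colCellB_nat, Bool.and_eq_true, bne_iff_ne, beq_iff_eq, ne_eq]
  tauto

def markStepB (cols : List (List Int)) (s : List (List Bool)) (k : Nat × Nat) : List (List Bool) :=
  if colCellB cols (k.1 : Int) (k.2 : Int) != 0 && colCellB cols (k.1 : Int) (k.2 : Int) == colCellB cols (k.1 : Int) ((k.2 : Int) + 1) &&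
      colCellB cols (k.1 : Int) (k.2 : Int) == colCellB cols ((k.1 : Int) + 1) (k.2 : Int) && colCellB cols (k.1 : Int) (k.2 : Int) == colCellB cols ((k.1 : Int) + 1) ((k.2 : Int) + 1) then
    updMany s [(k.1, k.2), (k.1, k.2 + 1), (k.1 + 1, k.2), (k.1 + 1, k.2 + 1)] true
  else s

theorem set4B_eq (cols : List (List Int)) (mks : List (List Bool)) (b a : Nat) :
    (if colCellB cols (b : Int) (a : Int) != 0 && colCellB cols (b : Int) (a : Int) == colCellB cols (b : Int) ((a : Int) + 1) &&
        colCellB cols (b : Int) (a : Int) == colCellB cols ((b : Int) + 1) (a : Int) && colCellB cols (b : Int) (a : Int) == colCellB cols ((b : Int) + 1) ((a : Int) + 1) then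
        markSetB (markSetB (markSetB (markSetB mks (b : Int) (a : Int)) (b : Int) ((a : Int) + 1))
          ((b : Int) + 1) (a : Int)) ((b : Int) + 1) ((a : Int) + 1)
      else mks)
    = markStepB cols mks (b, a) := by
  have h1 : ((a : Int) + 1) = ((a + 1 : Nat) : Int) := by push_cast; ring
  have h2 : ((b : Int) + 1) = ((b + 1 : Nat) : Int) := by push_cast; ring
  unfold markStepB
  simp only [h1, h2, markSetB_nat, updMany, List.foldl_cons, List.foldl_nil]

theorem marksB_char (m n : Int) (cols : List (List Int)) (hm : 2 ≤ m) (hn : 2 ≤ n) :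
    buildMarksB m n cols = (List.range n.toNat).map (fun j =>
      (List.range m.toNat).map (fun i =>
        if PB cols n.toNat m.toNat j i then true else false)) := by
  have hm1 : (m - 1 : Int).toNat = m.toNat - 1 := by omega
  have hn1 : (n - 1 : Int).toNat = n.toNat - 1 := by omega
  unfold buildMarksB
  rw [pyRange_cast (n - 1) (by omega), pyRange_cast (m - 1) (by omega),
    pyRange_cast n (by omega), hm1, hn1]
  have hiniteq : (List.map (fun t : Nat => (t : Int)) (List.range n.toNat)).map
      (fun _ => List.replicate m.toNat false)
      = List.replicate n.toNat (List.replicate m.toNat false) := by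
    rw [List.map_map,
      show ((fun _ : Int => List.replicate m.toNat false) ∘ (fun t : Nat => (t : Int)))
        = (fun _ : Nat => List.replicate m.toNat false) from rfl,
      List.map_const', List.length_range]
  rw [hiniteq, List.foldl_map]
  have inner_eq : ∀ (b : Nat) (mks : List (List Bool)),
      (List.map (fun t : Nat => (t : Int)) (List.range (m.toNat - 1))).foldl
        (fun mks (a : Int) =>
          if colCellB cols (b : Int) a != 0 && colCellB cols (b : Int) a == colCellB cols (b : Int) (a + 1) &&
              colCellB cols (b : Int) a == colCellB cols ((b : Int) + 1) a && colCellB cols (b : Int) a == colCellB cols ((b : Int) + 1) (a + 1) then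
            markSetB (markSetB (markSetB (markSetB mks (b : Int) a) (b : Int) (a + 1))
              ((b : Int) + 1) a) ((b : Int) + 1) (a + 1)
          else mks) mks
      = (List.range (m.toNat - 1)).foldl (fun mks a => markStepB cols mks (b, a)) mks := by
    intro b mks
    rw [List.foldl_map]
    exact PySem.List.foldl_congr_mem _ _ _ _ (fun acc a ha => set4B_eq cols acc b a)
  trans ((List.range (n.toNat - 1)).foldl (fun mks (b : Nat) =>
      (List.range (m.toNat - 1)).foldl (fun mks (a : Nat) => markStepB cols mks (b, a)) mks)
      (List.replicate n.toNat (List.replicate m.toNat false)))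
  · exact PySem.List.foldl_congr_mem _ _ _ _ (fun acc b hb => inner_eq b acc)
  rw [foldl_nest_flat (List.range (n.toNat - 1)) (fun _ => List.range (m.toNat - 1))
    (markStepB cols)]
  have hinit : MatShape (List.replicate n.toNat (List.replicate m.toNat false))
      n.toNat m.toNat := by
    refine ⟨by simp, ?_⟩
    intro row hrow
    rw [List.eq_of_mem_replicate hrow]
    simp
  obtain ⟨hshape, hent⟩ := mark_fold
    (fun k : Nat × Nat => colCellB cols (k.1 : Int) (k.2 : Int) != 0 && colCellB cols (k.1 : Int) (k.2 : Int) == colCellB cols (k.1 : Int) ((k.2 : Int) + 1) &&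
      colCellB cols (k.1 : Int) (k.2 : Int) == colCellB cols ((k.1 : Int) + 1) (k.2 : Int) && colCellB cols (k.1 : Int) (k.2 : Int) == colCellB cols ((k.1 : Int) + 1) ((k.2 : Int) + 1))
    (fun k : Nat × Nat => [(k.1, k.2), (k.1, k.2 + 1), (k.1 + 1, k.2), (k.1 + 1, k.2 + 1)])
    true false
    ((List.range (n.toNat - 1)).flatMap fun b => (List.range (m.toNat - 1)).map fun a => (b, a))
    _ hinit (by
      intro k hk pr hpr
      simp only [List.mem_flatMap, List.mem_map, List.mem_range] at hk
      obtain ⟨b, hb, a, ha, hab⟩ := hk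
      subst hab
      simp only [List.mem_cons, List.not_mem_nil, or_false] at hpr
      rcases hpr with h | h | h | h <;> (subst h; exact ⟨by omega, by omega⟩))
  unfold markStepB
  apply matEq false
  · exact hshape
  · intro j i hj hi
    rw [hent j i hj hi]
    have hz : ent (List.replicate n.toNat (List.replicate m.toNat false)) j i false = false := by
      unfold ent
      rcases Nat.lt_or_ge j n.toNat with h | h
      · have hr : (List.replicate n.toNat (List.replicate m.toNat false)).getD j []
            = List.replicate m.toNat false := by
          rw [List.getD_eq_getElem _ _ (by simpa using h)]
          exact List.getElem_replicate _
        rw [hr]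
        exact getD_replicate_self _ i false
      · have hr : (List.replicate n.toNat (List.replicate m.toNat false)).getD j []
            = ([] : List Bool) := by
          rw [List.getD_eq_getElem?_getD, List.getElem?_eq_none (by simpa using h)]
          rfl
        rw [hr]
        rfl
    rw [hz]
    by_cases hP : PB cols n.toNat m.toNat j i
    · rw [if_pos hP]
      obtain ⟨b, hb, a, ha, hbq, hap, hu, hij⟩ := hP
      rw [if_pos ?_]
      refine ⟨(b, a), ?_, (condB_iff cols b a).2 hu, ?_⟩
      · simp only [List.mem_flatMap, List.mem_map, List.mem_range]
        exact ⟨b, by omega, a, by omega, rfl⟩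
      · simp only [List.mem_cons, List.not_mem_nil, or_false, Prod.mk.injEq]
        tauto
    · rw [if_neg hP, if_neg ?_]
      rintro ⟨k, hk, hc, hmem⟩
      apply hP
      simp only [List.mem_flatMap, List.mem_map, List.mem_range] at hk
      obtain ⟨b, hb, a, ha, hab⟩ := hk
      subst hab
      refine ⟨b, List.mem_range.2 (by omega), a, List.mem_range.2 (by omega), by omega, by omega,
        (condB_iff cols b a).1 hc, ?_⟩
      simp only [List.mem_cons, List.not_mem_nil, or_false, Prod.mk.injEq] at hmem
      tauto

-- ---------- counting: both rounds count the same marked set ----------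

theorem getD_map_range {α : Type} (f : Nat → α) {t k : Nat} (h : t < k) (d : α) :
    ((List.range k).map f).getD t d = f t := by
  rw [List.getD_eq_getElem _ _ (by simp [h]), List.getElem_map, List.getElem_range]

theorem sum_list_range (f : Nat → Int) : ∀ p : Nat,
    ((List.range p).map f).sum = ∑ i ∈ Finset.range p, f i := by
  intro p
  induction p with
  | zero => simp
  | succ p ih => rw [List.range_succ, List.map_append, List.sum_append, Finset.sum_range_succ, ih]; simp

def transp (bd : List (List Int)) (p q : Nat) : List (List Int) :=
  (List.range q).map (fun j => colOf bd p j)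

theorem ent_transp (bd : List (List Int)) {p q j i : Nat} (hj : j < q) (hi : i < p) :
    ent (transp bd p q) j i 0 = ent bd i j 0 := by
  unfold ent transp
  rw [getD_map_range _ hj]
  exact getD_colOf bd p j hi 0

theorem PB_transp (bd : List (List Int)) (p q j i : Nat) :
    PB (transp bd p q) q p j i ↔ PA bd p q i j := by
  unfold PB PA unifB unifA
  constructor
  · rintro ⟨b, hb, a, ha, hbq, hap, hu, hji⟩
    rw [ent_transp bd (by omega) (by omega), ent_transp bd (by omega) (by omega),
      ent_transp bd (by omega) (by omega), ent_transp bd (by omega) (by omega)] at hu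
    exact ⟨a, ha, b, hb, hap, hbq, ⟨hu.1, hu.2.2.1, hu.2.1, hu.2.2.2⟩, hji.2, hji.1⟩
  · rintro ⟨a, ha, b, hb, hap, hbq, hu, hi2, hj2⟩
    refine ⟨b, hb, a, ha, hbq, hap, ?_, hj2, hi2⟩
    rw [ent_transp bd (by omega) (by omega), ent_transp bd (by omega) (by omega),
      ent_transp bd (by omega) (by omega), ent_transp bd (by omega) (by omega)]
    exact ⟨hu.1, hu.2.2.1, hu.2.1, hu.2.2.2⟩

theorem foldl_add_gen {α : Type} (g : α → Int) (L : List α) (s : Int) :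
    L.foldl (fun c x => c + g x) s = s + (L.map g).sum := by
  induction L generalizing s with
  | nil => simp
  | cons a L ih => simp [ih, add_assoc]

theorem cntA_char (m n : Int) (bd : List (List Int)) (hm : 2 ≤ m) (hn : 2 ≤ n) :
    cntA m (buildRemoveA m n bd)
      = ∑ i ∈ Finset.range m.toNat, ∑ j ∈ Finset.range n.toNat,
          (if PA bd m.toNat n.toNat i j then (1 : Int) else 0) := by
  rw [removeA_char m n bd hm hn]
  unfold cntA
  rw [pyRange_cast m (by omega), List.foldl_map]
  simp only [PySem.List.pyGetD_natCast]
  trans (0 + ((List.range m.toNat).map (fun i =>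
      (((List.range m.toNat).map (fun i => (List.range n.toNat).map (fun j =>
        if PA bd m.toNat n.toNat i j then (1 : Int) else 0))).getD i []).foldl (· + ·) 0)).sum)
  · exact foldl_add_gen _ _ _
  rw [zero_add]
  have hmap : ∀ i ∈ List.range m.toNat,
      (((List.range m.toNat).map (fun i => (List.range n.toNat).map (fun j =>
        if PA bd m.toNat n.toNat i j then (1 : Int) else 0))).getD i []).foldl (· + ·) 0
      = ∑ j ∈ Finset.range n.toNat, (if PA bd m.toNat n.toNat i j then (1 : Int) else 0) := by
    intro i hi
    rw [getD_map_range _ (List.mem_range.1 hi), ← List.sum_eq_foldl, sum_list_range]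
  rw [List.map_congr_left hmap, sum_list_range]

theorem countP_range_int (f : Nat → Bool) : ∀ k : Nat,
    (((List.range k).countP f : Nat) : Int) = ∑ i ∈ Finset.range k, (if f i then (1 : Int) else 0) := by
  intro k
  induction k with
  | zero => simp
  | succ p ih =>
    rw [List.range_succ, List.countP_append, Finset.sum_range_succ, ← ih]
    by_cases h : f p <;> simp [h]

theorem cntB_char (m n : Int) (cols : List (List Int)) (hm : 2 ≤ m) (hn : 2 ≤ n) :
    cntB (buildMarksB m n cols)
      = ∑ j ∈ Finset.range n.toNat, ∑ i ∈ Finset.range m.toNat,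
          (if PB cols n.toNat m.toNat j i then (1 : Int) else 0) := by
  rw [marksB_char m n cols hm hn]
  unfold cntB
  trans (0 + (((List.range n.toNat).map (fun j => (List.range m.toNat).map (fun i =>
      if PB cols n.toNat m.toNat j i then true else false))).map
      (fun mk => ((PySem.List.count mk true : Nat) : Int))).sum)
  · exact foldl_add_gen _ _ _
  rw [zero_add, List.map_map]
  have hmap : ∀ j ∈ List.range n.toNat,
      ((fun mk => ((PySem.List.count mk true : Nat) : Int)) ∘ (fun j =>
        (List.range m.toNat).map (fun i =>
          if PB cols n.toNat m.toNat j i then true else false))) j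
      = ∑ i ∈ Finset.range m.toNat, (if PB cols n.toNat m.toNat j i then (1 : Int) else 0) := by
    intro j hj
    simp only [Function.comp]
    rw [PySem.List.count_eq, List.count_eq_countP, List.countP_map]
    have heq : ((fun x => x == true) ∘ fun i =>
        if PB cols n.toNat m.toNat j i then true else false)
        = fun i => decide (PB cols n.toNat m.toNat j i) := by
      funext i
      by_cases h : PB cols n.toNat m.toNat j i <;> simp [h]
    rw [heq, countP_range_int]
    apply Finset.sum_congr rfl
    intro i hi
    by_cases h : PB cols n.toNat m.toNat j i <;> simp [h]
  rw [List.map_congr_left hmap, sum_list_range]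

theorem cnt_eq (m n : Int) (bd : List (List Int)) (hm : 2 ≤ m) (hn : 2 ≤ n) :
    cntA m (buildRemoveA m n bd) = cntB (buildMarksB m n (transp bd m.toNat n.toNat)) := by
  rw [cntA_char m n bd hm hn, cntB_char m n _ hm hn, Finset.sum_comm]
  apply Finset.sum_congr rfl
  intro j hj
  apply Finset.sum_congr rfl
  intro i hi
  rw [if_congr (PB_transp bd m.toNat n.toNat j i) rfl rfl]

-- ---------- per-column model of A's pull-down gravity ----------

-- surviving (unremoved) cells of a column, top to bottom
def surv : List Int → List Int → List Int
  | v :: c, t :: r => if t = 1 then surv c r else v :: surv c r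
  | _, _ => []

-- the column-local content of A's inner `while` search
def cfind (r : List Int) (x : Int) : Int :=
  if h : 0 ≤ x ∧ r.getD x.toNat 0 = 1 then cfind r (x - 1) else x
termination_by (x + 1).toNat
decreasing_by omega

-- the column-local content of A's gravity body at row i
def cstep (i : Nat) (st : List Int × List Int) : List Int × List Int :=
  if st.2.getD i 0 = 1 then
    if cfind st.2 ((i : Int) - 1) < 0 then (st.1.set i 0, st.2)
    else (st.1.set i (st.1.getD (cfind st.2 ((i : Int) - 1)).toNat 0),
      st.2.set (cfind st.2 ((i : Int) - 1)).toNat 1)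
  else st

def gfold (L : List Nat) (st : List Int × List Int) : List Int × List Int :=
  L.foldl (fun st i => cstep i st) st

def descL (p : Nat) : List Nat := (List.range p).map (fun k => p - 1 - k)

theorem descL_succ (p : Nat) : descL (p + 1) = p :: descL p := by
  unfold descL
  rw [List.range_succ_eq_map, List.map_cons, List.map_map]
  congr 1
  apply List.map_congr_left
  intro k _
  simp only [Function.comp]
  omega

theorem mem_descL {p i : Nat} (h : i ∈ descL p) : i < p := by
  unfold descL at h
  simp only [List.mem_map, List.mem_range] at h
  obtain ⟨k, hk, rfl⟩ := h
  omega

-- bottom-up recursion equivalent to processing rows from the bottom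
def procUp : List Int → List Int → List Int
  | v :: c, t :: q =>
    if t = 1 then
      match q.findIdx? (fun u => u != 1) with
      | none => 0 :: procUp c q
      | some k => c.getD k 0 :: procUp c (q.set k 1)
    else v :: procUp c q
  | _, _ => []

theorem cfind_neg (r : List Int) (x : Int) (h : x < 0) : cfind r x = x := by
  unfold cfind
  rw [dif_neg (by omega)]

theorem cfind_le (r : List Int) : ∀ x : Int, cfind r x ≤ x := by
  intro x
  induction hk : (x + 1).toNat using Nat.strong_induction_on generalizing x with
  | _ k ih =>
    unfold cfind
    split
    · next h => exact le_trans (ih (x - 1 + 1).toNat (by omega) (x - 1) rfl) (by omega)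
    · exact le_rfl

theorem cfind_append (r₀ : List Int) (u : Int) : ∀ x : Int, x < (r₀.length : Int) →
    cfind (r₀ ++ [u]) x = cfind r₀ x := by
  intro x
  induction hk : (x + 1).toNat using Nat.strong_induction_on generalizing x with
  | _ k ih =>
    intro hx
    rcases lt_or_ge x 0 with h | h
    · rw [cfind_neg _ _ h, cfind_neg _ _ h]
    · have hget : (r₀ ++ [u]).getD x.toNat 0 = r₀.getD x.toNat 0 :=
        List.getD_append _ _ _ _ (by omega)
      unfold cfind
      rw [hget]
      split
      · exact ih (x - 1 + 1).toNat (by omega) (x - 1) rfl (by omega)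
      · rfl

theorem cfind_char : ∀ r₀ : List Int,
    cfind r₀ ((r₀.length : Int) - 1)
      = (match r₀.reverse.findIdx? (fun u => u != 1) with
         | none => -1
         | some k => (r₀.length : Int) - 1 - k) := by
  intro r₀
  induction r₀ using List.reverseRecOn with
  | nil => simp [cfind_neg]
  | append_singleton s u ih =>
    have hget : (s ++ [u]).getD s.length 0 = u := by
      rw [List.getD_append_right _ _ _ _ (le_refl _), Nat.sub_self]
      rfl
    rw [show (((s ++ [u]).length : Nat) : Int) = (s.length : Int) + 1 by simp]
    rw [List.reverse_append, List.reverse_singleton, List.singleton_append,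
      List.findIdx?_cons]
    by_cases hu : u = 1
    · subst hu
      simp only [bne_self_eq_false]
      have hstep : cfind (s ++ [1]) ((s.length : Int) + 1 - 1) = cfind s ((s.length : Int) - 1) := by
        have h1 : cfind (s ++ [1]) ((s.length : Int) + 1 - 1)
            = cfind (s ++ [1]) ((s.length : Int) + 1 - 1 - 1) := by
          conv_lhs => unfold cfind
          rw [dif_pos ⟨by omega,
            by rw [show ((s.length : Int) + 1 - 1).toNat = s.length by omega]; exact hget⟩]
        rw [h1, show (s.length : Int) + 1 - 1 - 1 = (s.length : Int) - 1 by ring,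
          cfind_append s 1 ((s.length : Int) - 1) (by omega)]
      rw [hstep, ih]
      cases hidx : s.reverse.findIdx? (fun u => u != 1) with
      | none => simp
      | some k => simp; ring
    · have hbu : (u != 1) = true := by simpa using hu
      rw [hbu]
      have hval : cfind (s ++ [u]) ((s.length : Int) + 1 - 1) = (s.length : Int) := by
        conv_lhs => unfold cfind
        rw [dif_neg (by
          rw [show ((s.length : Int) + 1 - 1).toNat = s.length by omega, hget]
          simp [hu])]
        omega
      rw [hval]
      simp

theorem cstep_len (i : Nat) (st : List Int × List Int) :
    (cstep i st).1.length = st.1.length ∧ (cstep i st).2.length = st.2.length := by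
  unfold cstep
  split
  · split <;> simp
  · exact ⟨rfl, rfl⟩

theorem cstep_append (i : Nat) (b₀ r₀ : List Int) (v u : Int)
    (hib : i < b₀.length) (hir : i < r₀.length) :
    cstep i (b₀ ++ [v], r₀ ++ [u])
      = ((cstep i (b₀, r₀)).1 ++ [v], (cstep i (b₀, r₀)).2 ++ [u]) := by
  unfold cstep
  have hget : (r₀ ++ [u]).getD i 0 = r₀.getD i 0 := List.getD_append _ _ _ _ hir
  rw [hget]
  split
  · have hcf : cfind (r₀ ++ [u]) ((i : Int) - 1) = cfind r₀ ((i : Int) - 1) :=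
      cfind_append r₀ u _ (by omega)
    rw [hcf]
    have hle := cfind_le r₀ ((i : Int) - 1)
    split
    · next h =>
      simp only
      rw [List.set_append, if_pos hib]
    · next h =>
      have hxr : (cfind r₀ ((i : Int) - 1)).toNat < r₀.length := by omega
      have hxb : (cfind r₀ ((i : Int) - 1)).toNat < b₀.length := by omega
      simp only
      rw [List.set_append, if_pos hib, List.set_append, if_pos hxr,
        List.getD_append _ _ _ _ hxb]
  · rfl

theorem gfold_append : ∀ (L : List Nat) (b₀ r₀ : List Int) (v u : Int),
    (∀ i ∈ L, i < b₀.length ∧ i < r₀.length) →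
    gfold L (b₀ ++ [v], r₀ ++ [u])
      = ((gfold L (b₀, r₀)).1 ++ [v], (gfold L (b₀, r₀)).2 ++ [u]) := by
  intro L
  induction L with
  | nil => intro b₀ r₀ v u _; rfl
  | cons i L ih =>
    intro b₀ r₀ v u hb
    have hi := hb i List.mem_cons_self
    show gfold L (cstep i (b₀ ++ [v], r₀ ++ [u])) = _
    rw [cstep_append i b₀ r₀ v u hi.1 hi.2]
    rw [ih (cstep i (b₀, r₀)).1 (cstep i (b₀, r₀)).2 v u (by
      intro i' hi'
      have := hb i' (List.mem_cons_of_mem _ hi')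
      rw [(cstep_len i (b₀, r₀)).1, (cstep_len i (b₀, r₀)).2]
      exact this)]
    rfl

theorem surv_length_le : ∀ c q : List Int, (surv c q).length ≤ c.length := by
  intro c
  induction c with
  | nil => intro q; cases q <;> simp [surv]
  | cons v c ih =>
    intro q
    cases q with
    | nil => simp [surv]
    | cons t q =>
      unfold surv
      split
      · exact le_trans (ih q) (by simp)
      · simpa using ih q

theorem surv_all_one : ∀ c q : List Int, (∀ u ∈ q, u = 1) → surv c q = [] := by
  intro c
  induction c with
  | nil => intro q _; cases q <;> rfl
  | cons v c ih =>
    intro q hq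
    cases q with
    | nil => rfl
    | cons t q =>
      unfold surv
      rw [if_pos (hq t List.mem_cons_self)]
      exact ih q (fun u hu => hq u (List.mem_cons_of_mem _ hu))

theorem surv_set_first : ∀ (q' c' : List Int) (k : Nat),
    q'.findIdx? (fun u => u != 1) = some k → c'.length = q'.length →
    surv c' q' = c'.getD k 0 :: surv c' (q'.set k 1) := by
  intro q'
  induction q' with
  | nil => intro c' k h _; simp at h
  | cons u rest ih =>
    intro c' k h hlen
    cases c' with
    | nil => simp at hlen
    | cons w crest =>
      rw [List.findIdx?_cons] at h
      by_cases hu : u = 1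
      · subst hu
        simp at h
        rcases h with ⟨k', hk', rfl⟩
        have hlen' : crest.length = rest.length := by simpa using hlen
        show surv crest rest = _
        rw [ih crest k' hk' hlen']
        rfl
      · have hbu : (u != 1) = true := by simpa using hu
        simp only [hbu, if_true, Option.some.injEq] at h
        subst h
        show (if u = 1 then surv crest rest else w :: surv crest rest) = _
        rw [if_neg hu]
        show _ = w :: surv (w :: crest) (1 :: rest)
        show w :: surv crest rest = w :: surv crest rest
        rfl

theorem procUp_char : ∀ c q : List Int, c.length = q.length →
    procUp c q = surv c q ++ List.replicate (c.length - (surv c q).length) 0 := by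
  intro c
  induction c with
  | nil =>
    intro q h
    have : q = [] := List.length_eq_zero_iff.1 h.symm
    subst this
    rfl
  | cons v c ih =>
    intro q hlen
    cases q with
    | nil => simp at hlen
    | cons t q' =>
      have hlen' : c.length = q'.length := by simpa using hlen
      by_cases ht : t = 1
      · subst ht
        cases hidx : q'.findIdx? (fun u => u != 1) with
        | none =>
          have hall : ∀ u ∈ q', u = 1 := fun u hu => by
            simpa using List.findIdx?_eq_none_iff.1 hidx u hu
          have hsurv : surv c q' = [] := surv_all_one c q' hall
          have hs2 : surv (v :: c) (1 :: q') = surv c q' := by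
            show (if (1 : Int) = 1 then surv c q' else v :: surv c q') = surv c q'
            rw [if_pos rfl]
          simp only [procUp]
          rw [if_pos trivial, hidx]
          show 0 :: procUp c q' = _
          rw [ih q' hlen', hs2, hsurv]
          simp [List.replicate_succ]
        | some k =>
          have hsf := surv_set_first q' c k hidx hlen'
          simp only [procUp]
          rw [if_pos trivial, hidx]
          show c.getD k 0 :: procUp c (q'.set k 1) = _
          rw [ih (q'.set k 1) (by simp [hlen'])]
          have hs2 : surv (v :: c) (1 :: q') = surv c q' := by
            show (if (1 : Int) = 1 then surv c q' else v :: surv c q') = surv c q'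
            rw [if_pos rfl]
          rw [hs2, hsf]
          simp only [List.cons_append, List.length_cons, Nat.succ_sub_succ]
      · simp only [procUp]
        rw [if_neg ht, ih q' hlen']
        have hs2 : surv (v :: c) (t :: q') = v :: surv c q' := by
          show (if t = 1 then surv c q' else v :: surv c q') = v :: surv c q'
          rw [if_neg ht]
        rw [hs2]
        simp only [List.cons_append, List.length_cons, Nat.succ_sub_succ]

theorem surv_append_last : ∀ (b₀ r₀ : List Int) (v u : Int), b₀.length = r₀.length →
    surv (b₀ ++ [v]) (r₀ ++ [u]) = surv b₀ r₀ ++ (if u = 1 then [] else [v]) := by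
  intro b₀
  induction b₀ with
  | nil =>
    intro r₀ v u hlen
    cases r₀ with
    | nil =>
      show (if u = 1 then surv [] [] else v :: surv [] []) = _
      split <;> rfl
    | cons t r₀ => simp at hlen
  | cons w b₀ ih =>
    intro r₀ v u hlen
    cases r₀ with
    | nil => simp at hlen
    | cons t r₀ =>
      have hlen' : b₀.length = r₀.length := by simpa using hlen
      show (if t = 1 then surv (b₀ ++ [v]) (r₀ ++ [u]) else w :: surv (b₀ ++ [v]) (r₀ ++ [u]))
        = (if t = 1 then surv b₀ r₀ else w :: surv b₀ r₀) ++ (if u = 1 then [] else [v])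
      rw [ih r₀ v u hlen']
      by_cases ht : t = 1
      · rw [if_pos ht, if_pos ht]
      · rw [if_neg ht, if_neg ht, List.cons_append]

theorem surv_reverse : ∀ b r : List Int, b.length = r.length →
    surv b.reverse r.reverse = (surv b r).reverse := by
  intro b
  induction b using List.reverseRecOn with
  | nil =>
    intro r hlen
    have : r = [] := List.length_eq_zero_iff.1 (by simpa using hlen.symm)
    subst this
    rfl
  | append_singleton b₀ v ih =>
    intro r hlen
    have hr : r ≠ [] := by
      intro h; subst h; simp at hlen
    obtain ⟨r₀, u, rfl⟩ : ∃ r₀ u, r = r₀ ++ [u] :=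
      ⟨r.dropLast, r.getLast hr, (List.dropLast_append_getLast hr).symm⟩
    have hlen' : b₀.length = r₀.length := by simpa using hlen
    rw [List.reverse_append, List.reverse_append, List.reverse_singleton,
      List.reverse_singleton, List.singleton_append, List.singleton_append,
      surv_append_last b₀ r₀ v u hlen']
    show (if u = 1 then surv b₀.reverse r₀.reverse else v :: surv b₀.reverse r₀.reverse) = _
    rw [ih r₀ hlen']
    split <;> simp

theorem getD_reverse (l : List Int) {k : Nat} (h : k < l.length) (d : Int) :
    l.reverse.getD k d = l.getD (l.length - 1 - k) d := by
  rw [List.getD_eq_getElem _ _ (by simpa using h), List.getD_eq_getElem _ _ (by omega),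
    List.getElem_reverse]

theorem set_reverse (l : List Int) (k : Nat) (h : k < l.length) (v : Int) :
    l.reverse.set k v = (l.set (l.length - 1 - k) v).reverse := by
  apply List.ext_getElem
  · simp
  · intro i h1 h2
    have hi : i < l.length := by simpa using h1
    rw [List.getElem_set, List.getElem_reverse, List.getElem_reverse, List.getElem_set]
    · by_cases hk : k = i
      · rw [if_pos hk, if_pos (by simp; omega)]
      · rw [if_neg hk, if_neg (by simp; omega)]
        simp only [List.length_set]

theorem gfold_procUp : ∀ (p : Nat) (b r : List Int), b.length = p → r.length = p →
    (gfold (descL p) (b, r)).1 = (procUp b.reverse r.reverse).reverse := by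
  intro p
  induction p with
  | zero =>
    intro b r hb hr
    have hb0 : b = [] := List.length_eq_zero_iff.1 hb
    have hr0 : r = [] := List.length_eq_zero_iff.1 hr
    subst hb0; subst hr0; rfl
  | succ p ih =>
    intro b r hb hr
    have hbne : b ≠ [] := by intro h; subst h; simp at hb
    have hrne : r ≠ [] := by intro h; subst h; simp at hr
    obtain ⟨b₀, v, rfl⟩ : ∃ b₀ v, b = b₀ ++ [v] :=
      ⟨b.dropLast, b.getLast hbne, (List.dropLast_append_getLast hbne).symm⟩
    obtain ⟨r₀, u, rfl⟩ : ∃ r₀ u, r = r₀ ++ [u] :=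
      ⟨r.dropLast, r.getLast hrne, (List.dropLast_append_getLast hrne).symm⟩
    have hb0 : b₀.length = p := by simpa using hb
    have hr0 : r₀.length = p := by simpa using hr
    rw [descL_succ]
    show (gfold (descL p) (cstep p (b₀ ++ [v], r₀ ++ [u]))).1 = _
    have hget : (r₀ ++ [u]).getD p 0 = u := by
      rw [List.getD_append_right _ _ _ _ (by omega), hr0, Nat.sub_self]
      rfl
    rw [List.reverse_append, List.reverse_append, List.reverse_singleton,
      List.reverse_singleton, List.singleton_append, List.singleton_append]
    have hmem : ∀ i ∈ descL p, i < b₀.length ∧ i < r₀.length := by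
      intro i hi
      have := mem_descL hi
      omega
    by_cases hu : u = 1
    · subst hu
      have hcf : cfind (r₀ ++ [1]) ((p : Int) - 1)
          = (match r₀.reverse.findIdx? (fun w => w != 1) with
             | none => (-1 : Int)
             | some k => (r₀.length : Int) - 1 - k) := by
        rw [show ((p : Int) - 1) = ((r₀.length : Int) - 1) by rw [hr0],
          cfind_append r₀ 1 _ (by omega), cfind_char]
      cases hidx : r₀.reverse.findIdx? (fun w => w != 1) with
      | none =>
        rw [hidx] at hcf
        have hx : cfind (r₀ ++ [1]) ((p : Int) - 1) = -1 := by rw [hcf]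
        have hc : cstep p (b₀ ++ [v], r₀ ++ [1]) = (b₀ ++ [0], r₀ ++ [1]) := by
          unfold cstep
          rw [if_pos (by simpa using hget), hx, if_pos (by omega)]
          simp only [Prod.mk.injEq]
          constructor
          · rw [List.set_append, if_neg (by omega), hb0, Nat.sub_self]
            rfl
          · trivial
        rw [hc, gfold_append (descL p) b₀ r₀ 0 1 hmem, ih b₀ r₀ hb0 hr0]
        simp only [procUp, if_pos trivial, hidx]
        rw [List.reverse_cons]
      | some k =>
        have hk : k < p := by
          have := (List.findIdx?_eq_some_iff_findIdx_eq.1 hidx).1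
          simpa [hr0] using this
        rw [hidx] at hcf
        have hxval : cfind (r₀ ++ [1]) ((p : Int) - 1) = (p : Int) - 1 - k := by
          rw [hcf, hr0]
        have htn : ((p : Int) - 1 - k).toNat = p - 1 - k := by omega
        have hc : cstep p (b₀ ++ [v], r₀ ++ [1])
            = (b₀ ++ [b₀.getD (p - 1 - k) 0], r₀.set (p - 1 - k) 1 ++ [1]) := by
          unfold cstep
          rw [if_pos (by simpa using hget), hxval, if_neg (by omega), htn]
          simp only [Prod.mk.injEq]
          constructor
          · rw [List.getD_append _ _ _ _ (by omega), List.set_append, if_neg (by omega),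
              hb0, Nat.sub_self]
            rfl
          · rw [List.set_append, if_pos (by omega)]
        rw [hc, gfold_append (descL p) b₀ (r₀.set (p - 1 - k) 1) _ 1 (by
          intro i hi
          have := mem_descL hi
          simp only [List.length_set]
          omega),
          ih b₀ (r₀.set (p - 1 - k) 1) hb0 (by simp [hr0])]
        simp only [procUp, if_pos trivial, hidx]
        rw [List.reverse_cons, getD_reverse b₀ (by omega) 0,
          set_reverse r₀ k (by omega) 1, hb0, hr0]
    · have hc : cstep p (b₀ ++ [v], r₀ ++ [u]) = (b₀ ++ [v], r₀ ++ [u]) := by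
        unfold cstep
        rw [if_neg (by rw [hget]; exact hu)]
      rw [hc, gfold_append (descL p) b₀ r₀ v u hmem, ih b₀ r₀ hb0 hr0]
      simp only [procUp, if_neg hu]
      rw [List.reverse_cons]

theorem gfold_desc_char (p : Nat) (b r : List Int) (hb : b.length = p) (hr : r.length = p) :
    (gfold (descL p) (b, r)).1
      = List.replicate (p - (surv b r).length) 0 ++ surv b r := by
  rw [gfold_procUp p b r hb hr, procUp_char _ _ (by simp [hb, hr]),
    surv_reverse b r (by omega)]
  rw [List.reverse_append, List.reverse_replicate, List.reverse_reverse]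
  congr 1
  · congr 1
    simp [hb]

-- ---------- projecting A's 2D gravity loop onto columns ----------

-- the body of A's gravity double loop, as a named function
def FstepA (i j : Int) (st : List (List Int) × List (List Int)) :
    List (List Int) × List (List Int) :=
  if cellA st.2 i j = 1 then
    if findXA st.2 j (i - 1) < 0 then (setCellA st.1 i j 0, st.2)
    else (setCellA st.1 i j (cellA st.1 (findXA st.2 j (i - 1)) j),
      setCellA st.2 (findXA st.2 j (i - 1)) j 1)
  else st

theorem gravityA_eq (m n : Int) (st : List (List Int) × List (List Int)) :
    gravityA m n st = (PySem.List.pyRange (m - 1) (-1) (-1)).foldl (fun st i =>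
      (PySem.List.pyRange 0 n 1).foldl (fun st j => FstepA i j st) st) st := rfl

def bshape_upd {bd : List (List Int)} {p q : Nat} (h : BShape bd p q) (i j : Nat) (v : Int) :
    BShape (upd bd i j v) p q := by
  obtain ⟨h1, h2⟩ := h
  refine ⟨by rw [length_upd]; exact h1, ?_⟩
  intro i' hi'
  rw [rowlen_upd]
  exact h2 i' hi'

theorem fx_col (rm : List (List Int)) (p q j : Nat) (_hs : MatShape rm p q) (_hj : j < q) :
    ∀ x : Int, x < (p : Int) → findXA rm (j : Int) x = cfind (colOf rm p j) x := by
  intro x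
  induction hk : (x + 1).toNat using Nat.strong_induction_on generalizing x with
  | _ k ih =>
    intro hx
    rcases lt_or_ge x 0 with h | h
    · unfold findXA cfind
      rw [dif_neg (by omega), dif_neg (by omega)]
    · have hxeq : x = ((x.toNat : Nat) : Int) := by omega
      have hcell : cellA rm x (j : Int) = (colOf rm p j).getD x.toNat 0 := by
        rw [hxeq, cellA_nat, getD_colOf rm p j (by omega) 0]
        congr 2
      unfold findXA cfind
      rw [hcell]
      by_cases hg : 0 ≤ x ∧ (colOf rm p j).getD x.toNat 0 = 1
      · rw [dif_pos hg, dif_pos hg]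
        exact ih (x - 1 + 1).toNat (by omega) (x - 1) rfl (by omega)
      · rw [dif_neg hg, dif_neg hg]

theorem getElem_colOf (bd : List (List Int)) (p j t : Nat) (h : t < (colOf bd p j).length) :
    (colOf bd p j)[t] = ent bd t j 0 := by
  simp [colOf]

theorem colOf_upd (bd : List (List Int)) (p : Nat) {i j : Nat} (v : Int)
    (hi : i < bd.length) (hj : j < (bd.getD i []).length) (j' : Nat) :
    colOf (upd bd i j v) p j' = if j' = j then (colOf bd p j').set i v else colOf bd p j' := by
  by_cases hjj : j' = j
  · subst hjj
    rw [if_pos rfl]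
    apply List.ext_getElem
    · simp [colOf]
    · intro t h1 h2
      rw [getElem_colOf _ _ _ _ h1, List.getElem_set, ent_upd bd v 0 hi hj]
      by_cases hit : i = t
      · rw [if_pos ⟨hit.symm, rfl⟩, if_pos hit]
      · rw [if_neg (by tauto), if_neg hit, getElem_colOf]
  · rw [if_neg hjj]
    apply List.ext_getElem
    · simp [colOf]
    · intro t h1 h2
      rw [getElem_colOf _ _ _ _ h1, getElem_colOf _ _ _ _ h2, ent_upd bd v 0 hi hj,
        if_neg (by tauto)]

def colPair (st : List (List Int) × List (List Int)) (p j : Nat) : List Int × List Int :=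
  (colOf st.1 p j, colOf st.2 p j)

theorem cstep_pair (i : Nat) (b r : List Int) :
    cstep i (b, r) = if r.getD i 0 = 1 then
      (if cfind r ((i : Int) - 1) < 0 then (b.set i 0, r)
       else (b.set i (b.getD (cfind r ((i : Int) - 1)).toNat 0),
         r.set (cfind r ((i : Int) - 1)).toNat 1))
    else (b, r) := rfl

theorem Fstep_proj (st : List (List Int) × List (List Int)) (p q i j : Nat)
    (h1 : BShape st.1 p q) (h2 : MatShape st.2 p q) (hi : i < p) (hj : j < q) :
    (BShape (FstepA (i : Int) (j : Int) st).1 p q ∧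
      MatShape (FstepA (i : Int) (j : Int) st).2 p q) ∧
    ∀ j' < q, colPair (FstepA (i : Int) (j : Int) st) p j'
      = if j' = j then cstep i (colPair st p j') else colPair st p j' := by
  have hi2 : i < st.2.length := by rw [h2.1]; exact hi
  have hrow2 : (st.2.getD i []).length = q := h2.2 _ (getD_mem_of_lt hi2)
  have hi1 : i < st.1.length := by have := h1.1; omega
  have hrow1 : j < (st.1.getD i []).length := by have := h1.2 i hi; omega
  have hcell : cellA st.2 (i : Int) (j : Int) = (colOf st.2 p j).getD i 0 := by
    rw [cellA_nat, getD_colOf _ _ _ hi]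
  have hfx : findXA st.2 (j : Int) ((i : Int) - 1) = cfind (colOf st.2 p j) ((i : Int) - 1) :=
    fx_col st.2 p q j h2 hj _ (by omega)
  by_cases hc : cellA st.2 (i : Int) (j : Int) = 1
  · have hguard : (colOf st.2 p j).getD i 0 = 1 := by rw [← hcell]; exact hc
    by_cases hx : findXA st.2 (j : Int) ((i : Int) - 1) < 0
    · have hL : FstepA (i : Int) (j : Int) st = (upd st.1 i j 0, st.2) := by
        unfold FstepA
        rw [if_pos hc, if_pos hx, setCellA_nat]
      refine ⟨by rw [hL]; exact ⟨bshape_upd h1 i j 0, h2⟩, ?_⟩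
      intro j' hj'
      by_cases hjj : j' = j
      · rw [hL, if_pos hjj, hjj]
        show (colOf (upd st.1 i j 0) p j, colOf st.2 p j)
          = cstep i (colOf st.1 p j, colOf st.2 p j)
        rw [colOf_upd st.1 p 0 hi1 hrow1 j, if_pos rfl, cstep_pair, if_pos hguard,
          if_pos (by rw [← hfx]; exact hx)]
      · rw [hL, if_neg hjj]
        show (colOf (upd st.1 i j 0) p j', colOf st.2 p j')
          = (colOf st.1 p j', colOf st.2 p j')
        rw [colOf_upd st.1 p 0 hi1 hrow1 j', if_neg hjj]
    · have hx0 : 0 ≤ findXA st.2 (j : Int) ((i : Int) - 1) := by omega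
      have hxle : findXA st.2 (j : Int) ((i : Int) - 1) ≤ (i : Int) - 1 := by
        rw [hfx]; exact cfind_le _ _
      have hxcast : findXA st.2 (j : Int) ((i : Int) - 1)
          = (((findXA st.2 (j : Int) ((i : Int) - 1)).toNat : Nat) : Int) := by omega
      have hw : cellA st.1 (findXA st.2 (j : Int) ((i : Int) - 1)) (j : Int)
          = (colOf st.1 p j).getD (findXA st.2 (j : Int) ((i : Int) - 1)).toNat 0 := by
        rw [hxcast, cellA_nat, getD_colOf _ _ _ (by omega)]
        congr 2
      have hxi2 : (findXA st.2 (j : Int) ((i : Int) - 1)).toNat < st.2.length := by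
        rw [h2.1]; omega
      have hxrow2 : j < (st.2.getD (findXA st.2 (j : Int) ((i : Int) - 1)).toNat []).length := by
        rw [h2.2 _ (getD_mem_of_lt hxi2)]; exact hj
      have hL : FstepA (i : Int) (j : Int) st
          = (upd st.1 i j ((colOf st.1 p j).getD (findXA st.2 (j : Int) ((i : Int) - 1)).toNat 0),
             upd st.2 (findXA st.2 (j : Int) ((i : Int) - 1)).toNat j 1) := by
        unfold FstepA
        rw [if_pos hc, if_neg hx, hw]
        congr 1
        · rw [setCellA_nat]
        · conv_lhs => rw [hxcast]
          rw [setCellA_nat]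
      refine ⟨by rw [hL]; exact ⟨bshape_upd h1 _ _ _, matshape_upd h2 _ _ _⟩, ?_⟩
      intro j' hj'
      by_cases hjj : j' = j
      · rw [hL, if_pos hjj, hjj]
        show (colOf (upd st.1 i j _) p j, colOf (upd st.2 _ j 1) p j)
          = cstep i (colOf st.1 p j, colOf st.2 p j)
        rw [colOf_upd st.1 p _ hi1 hrow1 j, if_pos rfl,
          colOf_upd st.2 p _ hxi2 hxrow2 j, if_pos rfl, cstep_pair, if_pos hguard,
          if_neg (by rw [← hfx]; exact hx), ← hfx]
      · rw [hL, if_neg hjj]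
        show (colOf (upd st.1 i j _) p j', colOf (upd st.2 _ j 1) p j')
          = (colOf st.1 p j', colOf st.2 p j')
        rw [colOf_upd st.1 p _ hi1 hrow1 j', if_neg hjj,
          colOf_upd st.2 p _ hxi2 hxrow2 j', if_neg hjj]
  · have hL : FstepA (i : Int) (j : Int) st = st := by
      unfold FstepA
      rw [if_neg hc]
    refine ⟨by rw [hL]; exact ⟨h1, h2⟩, ?_⟩
    intro j' hj'
    by_cases hjj : j' = j
    · rw [hL, if_pos hjj, hjj]
      show (colOf st.1 p j, colOf st.2 p j) = cstep i (colOf st.1 p j, colOf st.2 p j)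
      rw [cstep_pair, if_neg (by rw [← hcell]; exact hc)]
    · rw [hL, if_neg hjj]

theorem row_proj (p q i : Nat) (hi : i < p) : ∀ (LJ : List Nat)
    (st : List (List Int) × List (List Int)),
    (∀ j ∈ LJ, j < q) → LJ.Nodup → BShape st.1 p q → MatShape st.2 p q →
    (BShape (LJ.foldl (fun st (j : Nat) => FstepA (i : Int) (j : Int) st) st).1 p q ∧
      MatShape (LJ.foldl (fun st (j : Nat) => FstepA (i : Int) (j : Int) st) st).2 p q) ∧
    ∀ j' < q, colPair (LJ.foldl (fun st (j : Nat) => FstepA (i : Int) (j : Int) st) st) p j'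
      = if j' ∈ LJ then cstep i (colPair st p j') else colPair st p j' := by
  intro LJ
  induction LJ with
  | nil =>
    intro st _ _ h1 h2
    exact ⟨⟨h1, h2⟩, fun j' _ => by simp⟩
  | cons a L ihL =>
    intro st hb hnd h1 h2
    have ha : a < q := hb a List.mem_cons_self
    obtain ⟨hsh, hval⟩ := Fstep_proj st p q i a h1 h2 hi ha
    obtain ⟨hsh', hval'⟩ := ihL (FstepA (i : Int) (a : Int) st)
      (fun j hj => hb j (List.mem_cons_of_mem _ hj)) (List.nodup_cons.1 hnd).2 hsh.1 hsh.2
    refine ⟨hsh', ?_⟩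
    intro j' hj'
    rw [List.foldl_cons, hval' j' hj', hval j' hj']
    by_cases hmem : j' ∈ L
    · have hne : j' ≠ a := by
        intro h; subst h; exact (List.nodup_cons.1 hnd).1 hmem
      rw [if_pos hmem, if_neg hne, if_pos (List.mem_cons_of_mem _ hmem)]
    · by_cases hja : j' = a
      · rw [if_neg hmem, if_pos hja, if_pos (by simp [hja])]
      · rw [if_neg hmem, if_neg hja, if_neg (by simp [hja, hmem])]

theorem outer_proj (p q : Nat) : ∀ (LN : List Nat)
    (st : List (List Int) × List (List Int)),
    (∀ i ∈ LN, i < p) → BShape st.1 p q → MatShape st.2 p q →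
    BShape (LN.foldl (fun st (i : Nat) =>
        (List.range q).foldl (fun st (j : Nat) => FstepA (i : Int) (j : Int) st) st) st).1 p q ∧
    ∀ j' < q, colPair (LN.foldl (fun st (i : Nat) =>
        (List.range q).foldl (fun st (j : Nat) => FstepA (i : Int) (j : Int) st) st) st) p j'
      = gfold LN (colPair st p j') := by
  intro LN
  induction LN with
  | nil =>
    intro st _ h1 _
    exact ⟨h1, fun j' _ => rfl⟩
  | cons i L ihL =>
    intro st hb h1 h2
    have hi : i < p := hb i List.mem_cons_self
    obtain ⟨hsh, hval⟩ := row_proj p q i hi (List.range q) st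
      (fun j hj => List.mem_range.1 hj) (List.nodup_range) h1 h2
    obtain ⟨hsh', hval'⟩ := ihL _ (fun i' hi' => hb i' (List.mem_cons_of_mem _ hi')) hsh.1 hsh.2
    refine ⟨hsh', ?_⟩
    intro j' hj'
    rw [List.foldl_cons, hval' j' hj', hval j' hj', if_pos (List.mem_range.2 hj')]
    rfl

-- ---------- B's gravity: a per-column rebuild ----------

theorem foldl_set_getD (h : Nat → List Int → List Int) : ∀ (L : List Nat) (cs : List (List Int)),
    L.Nodup → (∀ j ∈ L, j < cs.length) →
    (L.foldl (fun cs j => cs.set j (h j (cs.getD j []))) cs).length = cs.length ∧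
    ∀ j' < cs.length, (L.foldl (fun cs j => cs.set j (h j (cs.getD j []))) cs).getD j' []
      = if j' ∈ L then h j' (cs.getD j' []) else cs.getD j' [] := by
  intro L
  induction L with
  | nil =>
    intro cs _ _
    exact ⟨rfl, fun j' _ => by simp⟩
  | cons a L ih =>
    intro cs hnd hb
    have ha : a < cs.length := hb a List.mem_cons_self
    obtain ⟨hl, hv⟩ := ih (cs.set a (h a (cs.getD a []))) (List.nodup_cons.1 hnd).2
      (fun j hj => by rw [List.length_set]; exact hb j (List.mem_cons_of_mem _ hj))
    rw [List.length_set] at hl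
    refine ⟨hl, ?_⟩
    intro j' hj'
    rw [List.foldl_cons, hv j' (by rw [List.length_set]; exact hj')]
    by_cases hmem : j' ∈ L
    · have hne : a ≠ j' := by
        intro h; subst h; exact (List.nodup_cons.1 hnd).1 hmem
      rw [if_pos hmem, if_pos (List.mem_cons_of_mem _ hmem)]
      congr 1
      rw [List.getD_eq_getElem?_getD, List.getElem?_set, if_neg hne,
        ← List.getD_eq_getElem?_getD]
    · by_cases hja : j' = a
      · subst hja
        rw [if_neg hmem, if_pos List.mem_cons_self]
        rw [List.getD_eq_getElem _ _ (by simpa using ha), List.getElem_set, if_pos rfl,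
          List.getD_eq_getElem _ _ ha]
      · rw [if_neg hmem, if_neg (by simp [hja, hmem])]
        rw [List.getD_eq_getElem?_getD, List.getElem?_set, if_neg (fun h => hja h.symm),
          ← List.getD_eq_getElem?_getD]

theorem gravB_map (m n : Int) (cols : List (List Int)) (mks : List (List Bool))
    (hn : 0 ≤ n) (hlen : cols.length = n.toNat) :
    gravityB m n cols mks
      = (List.range n.toNat).map (fun j => newColB m (cols.getD j []) (mks.getD j [])) := by
  unfold gravityB
  rw [pyRange_cast n hn, List.foldl_map]
  simp only [PySem.List.pySetD_natCast, PySem.List.pyGetD_natCast]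
  obtain ⟨hl, hv⟩ := foldl_set_getD (fun j col => newColB m col (mks.getD j []))
    (List.range n.toNat) cols List.nodup_range
    (fun j hj => by rw [hlen]; exact List.mem_range.1 hj)
  apply List.ext_getElem
  · rw [hl, hlen]
    simp
  · intro j h1 h2
    have hjq : j < n.toNat := by simpa using h2
    have hje : j < cols.length := by omega
    have := hv j hje
    rw [if_pos (List.mem_range.2 hjq)] at this
    rw [← List.getD_eq_getElem _ [] h1, this, List.getElem_map, List.getElem_range,
      List.getD_eq_getElem _ _ hje]

theorem FS : ∀ (col : List Int) (g : Nat → Bool),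
    ((List.range col.length).filter (fun t => !g t)).map (fun t => col.getD t 0)
      = surv col ((List.range col.length).map (fun i => if g i then (1 : Int) else 0)) := by
  intro col
  induction col with
  | nil => intro g; rfl
  | cons v col ih =>
    intro g
    rw [show (v :: col).length = col.length + 1 from rfl, List.range_succ_eq_map,
      List.filter_cons, List.filter_map, List.map_cons]
    by_cases hg : g 0
    · rw [show (!g 0) = false by simp [hg], if_neg (by simp), if_pos hg,
        List.map_map, List.map_map]
      have hsurv : surv (v :: col)
          ((1 : Int) :: List.map ((fun i => if g i = true then (1 : Int) else 0) ∘ Nat.succ)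
            (List.range col.length))
          = surv col (List.map ((fun i => if g i = true then (1 : Int) else 0) ∘ Nat.succ)
            (List.range col.length)) := by
        show (if (1 : Int) = 1 then _ else _) = _
        rw [if_pos rfl]
      rw [hsurv]
      exact ih (fun t => g (t + 1))
    · rw [show (!g 0) = true by simp [hg], if_pos rfl, if_neg hg, List.map_cons,
        List.map_map, List.map_map]
      have hsurv : surv (v :: col)
          ((0 : Int) :: List.map ((fun i => if g i = true then (1 : Int) else 0) ∘ Nat.succ)
            (List.range col.length))
          = v :: surv col (List.map ((fun i => if g i = true then (1 : Int) else 0) ∘ Nat.succ)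
            (List.range col.length)) := by
        show (if (0 : Int) = 1 then _ else _) = _
        rw [if_neg (by norm_num)]
      rw [hsurv]
      congr 1
      exact ih (fun t => g (t + 1))

theorem newcol_eq (m : Int) (hm : 0 ≤ m) (col : List Int) (g : Nat → Bool)
    (hc : col.length = m.toNat) :
    newColB m col ((List.range m.toNat).map g)
      = List.replicate (m.toNat - (surv col ((List.range m.toNat).map
          (fun i => if g i then (1 : Int) else 0))).length) 0
        ++ surv col ((List.range m.toNat).map (fun i => if g i then (1 : Int) else 0)) := by
  unfold newColB
  rw [pyRange_cast m hm, List.filter_map, List.map_map]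
  have hpred : ((List.range m.toNat).filter
      ((fun (i : Int) => !PySem.List.pyGetD ((List.range m.toNat).map g) i false)
        ∘ (fun t : Nat => (t : Int))))
      = (List.range m.toNat).filter (fun t => !g t) := by
    apply List.filter_congr
    intro t ht
    simp only [Function.comp, PySem.List.pyGetD_natCast]
    rw [getD_map_range g (List.mem_range.1 ht)]
  rw [hpred]
  have hmap : List.map ((fun i : Int => PySem.List.pyGetD col i 0) ∘ (fun t : Nat => (t : Int)))
      ((List.range m.toNat).filter (fun t => !g t))
      = List.map (fun t => col.getD t 0) ((List.range m.toNat).filter (fun t => !g t)) := by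
    apply List.map_congr_left
    intro t _
    simp [Function.comp, PySem.List.pyGetD_natCast]
  rw [hmap, ← hc, FS col g]
  have hs := surv_length_le col
    ((List.range col.length).map (fun i => if g i then (1 : Int) else 0))
  show List.replicate (m - PySem.List.len (surv col ((List.range col.length).map
      (fun i => if g i then (1 : Int) else 0)))).toNat 0
      ++ surv col ((List.range col.length).map (fun i => if g i then (1 : Int) else 0)) = _
  rw [show (m - PySem.List.len (surv col ((List.range col.length).map
      (fun i => if g i then (1 : Int) else 0)))).toNat
      = col.length - (surv col ((List.range col.length).map
        (fun i => if g i then (1 : Int) else 0))).length from by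
    simp only [PySem.List.len_eq]
    omega]

-- ---------- one round: A's gravity, seen through columns, is B's rebuild ----------

theorem matshape_matrix {α : Type} (p q : Nat) (f : Nat → Nat → α) :
    MatShape ((List.range p).map (fun i => (List.range q).map (f i))) p q := by
  refine ⟨by simp, ?_⟩
  intro row hrow
  simp only [List.mem_map, List.mem_range] at hrow
  obtain ⟨a, _, rfl⟩ := hrow
  simp

theorem ent_matrix {α : Type} (p q : Nat) (f : Nat → Nat → α) {i j : Nat}
    (hi : i < p) (hj : j < q) (d : α) :
    ent ((List.range p).map (fun i => (List.range q).map (f i))) i j d = f i j := by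
  unfold ent
  rw [getD_map_range _ hi, getD_map_range _ hj]

theorem colOf_matrix (p q : Nat) (f : Nat → Nat → Int) {j : Nat} (hj : j < q) :
    colOf ((List.range p).map (fun i => (List.range q).map (f i))) p j
      = (List.range p).map (fun i => f i j) := by
  apply List.ext_getElem
  · simp [colOf]
  · intro t h1 h2
    rw [getElem_colOf _ _ _ _ h1, List.getElem_map, List.getElem_range,
      ent_matrix p q f (by simpa [colOf] using h1) hj]

theorem getD_transp (bd : List (List Int)) (p q : Nat) {j : Nat} (hj : j < q) :
    (transp bd p q).getD j [] = colOf bd p j := by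
  unfold transp
  rw [getD_map_range _ hj]

theorem gravityA_nat (m n : Int) (hm : 2 ≤ m) (hn : 2 ≤ n)
    (st : List (List Int) × List (List Int)) :
    gravityA m n st = (descL m.toNat).foldl (fun st (i : Nat) =>
      (List.range n.toNat).foldl (fun st (j : Nat) => FstepA (i : Int) (j : Int) st) st) st := by
  rw [gravityA_eq, PySem.List.pyRange_neg_one,
    show ((m - 1 - (-1) : Int)).toNat = m.toNat by omega, List.foldl_map]
  have hinner : ∀ (k : Nat), k < m.toNat → ∀ st : List (List Int) × List (List Int),
      (PySem.List.pyRange 0 n 1).foldl (fun st j => FstepA (m - 1 - (k : Int)) j st) st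
        = (List.range n.toNat).foldl
            (fun st (j : Nat) => FstepA ((m.toNat - 1 - k : Nat) : Int) (j : Int) st) st := by
    intro k hk st
    rw [pyRange_cast n (by omega), List.foldl_map,
      show (m - 1 - (k : Int)) = ((m.toNat - 1 - k : Nat) : Int) by omega]
  rw [PySem.List.foldl_congr_mem _ _ _ _ (fun st k hk =>
    hinner k (by simpa using List.mem_range.1 hk) st)]
  unfold descL
  rw [List.foldl_map]

theorem round_grav (m n : Int) (hm : 2 ≤ m) (hn : 2 ≤ n) (bd : List (List Int))
    (hbs : BShape bd m.toNat n.toNat) :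
    BShape (gravityA m n (bd, buildRemoveA m n bd)).1 m.toNat n.toNat ∧
    gravityB m n (transp bd m.toNat n.toNat) (buildMarksB m n (transp bd m.toNat n.toNat))
      = transp (gravityA m n (bd, buildRemoveA m n bd)).1 m.toNat n.toNat := by
  have hrm := removeA_char m n bd hm hn
  have hrmshape : MatShape (buildRemoveA m n bd) m.toNat n.toNat := by
    rw [hrm]; exact matshape_matrix _ _ _
  obtain ⟨hshape, hproj⟩ := outer_proj m.toNat n.toNat (descL m.toNat)
    (bd, buildRemoveA m n bd) (fun i hi => mem_descL hi) hbs hrmshape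
  rw [← gravityA_nat m n hm hn] at hshape hproj
  refine ⟨hshape, ?_⟩
  have hmks := marksB_char m n (transp bd m.toNat n.toNat) hm hn
  rw [gravB_map m n _ _ (by omega) (by unfold transp; simp)]
  show _ = (List.range n.toNat).map
    (fun j => colOf (gravityA m n (bd, buildRemoveA m n bd)).1 m.toNat j)
  apply List.map_congr_left
  intro j hj
  have hjq : j < n.toNat := List.mem_range.1 hj
  have hpair := hproj j hjq
  have hfst : colOf (gravityA m n (bd, buildRemoveA m n bd)).1 m.toNat j
      = (gfold (descL m.toNat) (colPair (bd, buildRemoveA m n bd) m.toNat j)).1 := by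
    have := congrArg Prod.fst hpair
    exact this
  rw [getD_transp bd m.toNat n.toNat hjq, hmks, getD_map_range _ hjq,
    newcol_eq m (by omega) (colOf bd m.toNat j)
      (fun i => if PB (transp bd m.toNat n.toNat) n.toNat m.toNat j i then true else false)
      (length_colOf bd m.toNat j),
    hfst]
  show _ = (gfold (descL m.toNat) (colOf bd m.toNat j, colOf (buildRemoveA m n bd) m.toNat j)).1
  rw [gfold_desc_char m.toNat _ _ (length_colOf bd m.toNat j) (length_colOf _ m.toNat j)]
  have hcolr : colOf (buildRemoveA m n bd) m.toNat j
      = (List.range m.toNat).map (fun i => if PA bd m.toNat n.toNat i j then (1 : Int) else 0) := by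
    rw [hrm, colOf_matrix m.toNat n.toNat _ hjq]
  have hgmap : (List.range m.toNat).map (fun i =>
      if (if PB (transp bd m.toNat n.toNat) n.toNat m.toNat j i then true else false)
      then (1 : Int) else 0)
      = (List.range m.toNat).map (fun i => if PA bd m.toNat n.toNat i j then (1 : Int) else 0) := by
    apply List.map_congr_left
    intro i _
    by_cases h : PB (transp bd m.toNat n.toNat) n.toNat m.toNat j i
    · rw [if_pos h, if_pos ((PB_transp bd m.toNat n.toNat j i).1 h)]
      simp
    · rw [if_neg h, if_neg (fun hp => h ((PB_transp bd m.toNat n.toNat j i).2 hp))]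
      simp
  rw [hgmap, hcolr]

-- ---------- the round loop and the final theorem ----------

theorem loop_eq (m n : Int) (hm : 2 ≤ m) (hn : 2 ≤ n) : ∀ (fuel : Nat) (ans : Int)
    (bd : List (List Int)), BShape bd m.toNat n.toNat →
    loopA m n fuel ans bd = loopB m n fuel ans (transp bd m.toNat n.toNat) := by
  intro fuel
  induction fuel with
  | zero => intro ans bd _; rfl
  | succ fuel ih =>
    intro ans bd hbs
    have hcnt := cnt_eq m n bd hm hn
    obtain ⟨hshape, hgrav⟩ := round_grav m n hm hn bd hbs
    show (if cntA m (buildRemoveA m n bd) = 0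
        then ans + cntA m (buildRemoveA m n bd)
        else loopA m n fuel (ans + cntA m (buildRemoveA m n bd))
          (gravityA m n (bd, buildRemoveA m n bd)).1)
      = (if cntB (buildMarksB m n (transp bd m.toNat n.toNat)) = 0
        then ans
        else loopB m n fuel (ans + cntB (buildMarksB m n (transp bd m.toNat n.toNat)))
          (gravityB m n (transp bd m.toNat n.toNat)
            (buildMarksB m n (transp bd m.toNat n.toNat))))
    rw [← hcnt, hgrav]
    by_cases hc : cntA m (buildRemoveA m n bd) = 0
    · rw [if_pos hc, if_pos hc, hc, add_zero]
    · rw [if_neg hc, if_neg hc]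
      exact ih (ans + cntA m (buildRemoveA m n bd)) _ hshape

theorem foldl_add_replicate_zero : ∀ (k : Nat) (c : Int),
    (List.replicate k (0 : Int)).foldl (· + ·) c = c := by
  intro k
  induction k with
  | zero => intro c; rfl
  | succ k ih =>
    intro c
    rw [List.replicate_succ, List.foldl_cons, add_zero]
    exact ih c

theorem loopA_degenerate (m n : Int) (h : m ≤ 1 ∨ n ≤ 1) (fuel : Nat) (ans : Int)
    (bd : List (List Int)) : loopA m n (fuel + 1) ans bd = ans := by
  have hrm : buildRemoveA m n bd
      = (PySem.List.pyRange 0 m 1).map (fun _ => List.replicate n.toNat (0 : Int)) := by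
    unfold buildRemoveA
    rcases h with h | h
    · rw [PySem.List.pyRange_one_eq_nil (show (m - 1 : Int) ≤ 0 by omega), List.foldl_nil]
    · rw [PySem.List.pyRange_one_eq_nil (show (n - 1 : Int) ≤ 0 by omega)]
      exact PySem.List.foldl_ignore _ _
  have hrow : ∀ i : Nat,
      ((((PySem.List.pyRange 0 m 1).map (fun _ => List.replicate n.toNat (0 : Int))).getD i
        []).foldl (· + ·) 0) = 0 := by
    intro i
    rcases Nat.lt_or_ge i ((PySem.List.pyRange 0 m 1).map
        (fun _ => List.replicate n.toNat (0 : Int))).length with hlt | hge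
    · rw [List.getD_eq_getElem _ _ hlt, List.getElem_map]
      exact foldl_add_replicate_zero _ _
    · rw [List.getD_eq_getElem?_getD, List.getElem?_eq_none (by omega)]
      rfl
  have hcnt : cntA m (buildRemoveA m n bd) = 0 := by
    rw [hrm]
    generalize hM : (PySem.List.pyRange 0 m 1).map (fun _ => List.replicate n.toNat (0 : Int)) = M
    have hrow' : ∀ i : Nat, ((M.getD i []).foldl (· + ·) 0) = 0 := fun i => hM ▸ hrow i
    unfold cntA
    by_cases hm0 : m ≤ 0
    · rw [PySem.List.pyRange_one_eq_nil (show (m : Int) ≤ 0 from hm0), List.foldl_nil]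
    · rw [pyRange_cast m (by omega), List.foldl_map]
      simp only [PySem.List.pyGetD_natCast]
      trans (0 + ((List.range m.toNat).map (fun i : Nat => ((M.getD i []).foldl (· + ·) 0))).sum)
      · exact foldl_add_gen _ _ _
      rw [List.map_congr_left (fun i _ => hrow' i), List.map_const', List.sum_replicate]
      simp
  show (if cntA m (buildRemoveA m n bd) = 0
      then ans + cntA m (buildRemoveA m n bd)
      else loopA m n fuel (ans + cntA m (buildRemoveA m n bd))
        (gravityA m n (bd, buildRemoveA m n bd)).1) = ans
  rw [if_pos hcnt, hcnt, add_zero]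

theorem toCells_bshape (m n : Int) (board : List String) (hm : 2 ≤ m)
    (hlen : m ≤ (board.length : Int))
    (hrows : ∀ s ∈ board.take m.toNat, n ≤ (s.toList.length : Int)) :
    BShape (board.map (fun s => s.toList.map (fun c => (c.toNat : Int)))) m.toNat n.toNat := by
  constructor
  · simp only [List.length_map]
    omega
  · intro i hi
    have hib : i < board.length := by
      have := hlen; omega
    have hrow : (board.map (fun s => s.toList.map (fun c => (c.toNat : Int)))).getD i []
        = board[i].toList.map (fun c => (c.toNat : Int)) := by
      rw [List.getD_eq_getElem _ _ (by simpa using hib), List.getElem_map]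
    rw [hrow, List.length_map]
    have hmem : board[i] ∈ board.take m.toNat :=
      List.mem_take_iff_getElem.2 ⟨i, by omega, rfl⟩
    have := hrows _ hmem
    omega

theorem cols_init_eq (m n : Int) (hm : 2 ≤ m) (hn : 2 ≤ n) (bl : List (List Int)) :
    (PySem.List.pyRange 0 n 1).map (fun j =>
      (PySem.List.pyRange 0 m 1).map (fun i => colCellB bl i j))
    = transp bl m.toNat n.toNat := by
  rw [pyRange_cast n (by omega), pyRange_cast m (by omega), List.map_map]
  unfold transp
  apply List.map_congr_left
  intro j _
  simp only [Function.comp, List.map_map]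
  apply List.map_congr_left
  intro i _
  simp only [Function.comp]
  exact colCellB_nat bl i j

-- ===== VERDICT (by name: the statement is the Claim_ definition above) =====
theorem solution_spec : Claim_equal_solution := by
  unfold Claim_equal_solution
  intro m n board _ hpre
  unfold Spec_solution solution solution_alt
  by_cases hdeg : m < 2 ∨ n < 2
  · rw [if_pos hdeg]
    exact loopA_degenerate m n (by omega) _ 0 _
  · have hm : 2 ≤ m := by omega
    have hn : 2 ≤ n := by omega
    rw [if_neg hdeg]
    have hpre' : m ≤ (board.length : Int) ∧
        ∀ s ∈ board.take m.toNat, n ≤ (s.toList.length : Int) := by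
      rcases hpre with h | h | h
      · omega
      · omega
      · exact h
    have hbs := toCells_bshape m n board hm hpre'.1 hpre'.2
    rw [cols_init_eq m n hm hn]
    exact loop_eq m n hm hn _ 0 _ hbs
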